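-- pv_equiv track=rewrite | github.com/KazukiNoSuzaku/Leetcode | Python/1938_Maximum_Genetic_Difference_Query.py | maxGeneticDifference
-- ===== SOURCE A (Python) =====
-- from collections import defaultdict
--
-- def maxGeneticDifference(parents, queries):
--     """
--     :type parents: List[int]
--     :type queries: List[List[int]]
--     :rtype: List[int]
--     """
--     n = len(parents)
--     children = defaultdict(list)
--     root = -1
--     for i, p in enumerate(parents):
--         if p == -1:
--             root = i
--         else:
--             children[p].append(i)
--
--     # Group queries by node
--     query_map = defaultdict(list)
--     for idx, (node, val) in enumerate(queries):
--         query_map[node].append((val, idx))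
--
--     ans = [0] * len(queries)
--
--     # Trie with count
--     BITS = 18
--     trie = [[0, 0] for _ in range(n * BITS * 2 + 2)]
--     cnt = [0] * (n * BITS * 2 + 2)
--     trie_idx = [1]  # next available index
--
--     def new_node():
--         idx = trie_idx[0]
--         trie_idx[0] += 1
--         return idx
--
--     def insert(num):
--         node = 0
--         for i in range(BITS - 1, -1, -1):
--             bit = (num >> i) & 1
--             if trie[node][bit] == 0:
--                 trie[node][bit] = new_node()
--             node = trie[node][bit]
--             cnt[node] += 1
--
--     def remove(num):
--         node = 0
--         for i in range(BITS - 1, -1, -1):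
--             bit = (num >> i) & 1
--             node = trie[node][bit]
--             cnt[node] -= 1
--
--     def query(num):
--         node = 0
--         result = 0
--         for i in range(BITS - 1, -1, -1):
--             bit = (num >> i) & 1
--             want = 1 - bit
--             if trie[node][want] != 0 and cnt[trie[node][want]] > 0:
--                 result |= (1 << i)
--                 node = trie[node][want]
--             else:
--                 node = trie[node][bit]
--         return result
--
--     # DFS
--     stack = [(root, False)]
--     while stack:
--         node, leaving = stack.pop()
--         if leaving:
--             remove(node)
--             continue
--         insert(node)
--         stack.append((node, True))
--         # Answer queries for this node
--         for val, idx in query_map[node]: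
--             ans[idx] = query(val)
--         for child in children[node]:
--             stack.append((child, False))
--
--     return ans
-- ===== SOURCE B (Python) =====
-- def maxGeneticDifference(parents, queries):
--     # Simpler brute force: same iterative Euler tour, but no trie and no query
--     # grouping -- maintain the current root-to-node path and answer each query
--     # at its node by scanning the path for the best 18-bit XOR.
--     MASK = (1 << 18) - 1
--     root = -1
--     for i, p in enumerate(parents):
--         if p == -1:
--             root = i
--     ans = [0] * len(queries)
--     path = []
--     stack = [(root, False)]
--     while stack:
--         node, leaving = stack.pop()
--         if leaving:
--             path.pop()
--             continue
--         path.append(node)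
--         stack.append((node, True))
--         for idx, (qn, val) in enumerate(queries):
--             if qn == node:
--                 ans[idx] = max((a ^ val) & MASK for a in path)
--         if node != -1:
--             for i, p in enumerate(parents):
--                 if p == node:
--                     stack.append((i, False))
--     return ans
-- ===== Notes on version B (the rewrite author's own statement) =====
-- stated objective: simpler
-- what changed: B drops A's 18-bit XOR trie (insert/remove/count bookkeeping) and the offline query grouping: it keeps the plain current root-to-node path of the same iterative Euler tour and answers each query at its node by scanning that path for the best 18-bit-masked XOR.
import Mathlib
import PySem

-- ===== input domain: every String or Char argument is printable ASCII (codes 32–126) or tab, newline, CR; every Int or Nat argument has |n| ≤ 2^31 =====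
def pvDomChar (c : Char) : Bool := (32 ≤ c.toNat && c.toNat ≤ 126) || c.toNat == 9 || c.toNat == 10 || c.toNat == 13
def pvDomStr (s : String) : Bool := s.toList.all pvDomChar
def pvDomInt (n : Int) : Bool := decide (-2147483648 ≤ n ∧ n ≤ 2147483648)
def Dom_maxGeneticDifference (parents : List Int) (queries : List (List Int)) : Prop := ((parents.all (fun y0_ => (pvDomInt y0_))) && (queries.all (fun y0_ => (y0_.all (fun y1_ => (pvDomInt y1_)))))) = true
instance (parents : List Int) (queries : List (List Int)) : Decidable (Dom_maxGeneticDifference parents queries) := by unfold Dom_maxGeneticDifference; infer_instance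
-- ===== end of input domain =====

-- B replaces A's XOR trie + offline query grouping with a plain path scan on the
-- same Euler tour: simpler, no speed claim.

-- ===== PORT A =====

-- Python: (num >> i) & 1 — arithmetic right shift, exact as floor-division by 2^i
def pvBitA (num : Int) (i : Nat) : Int :=
  PySem.Int.band (PySem.Int.floordiv num ((2 : Int) ^ i)) 1

-- The Python lists `trie` (pairs) and `cnt` are indexed only inside their
-- allocated range n*BITS*2+2 under Pre_ (a DFS over ≤ n+1 nodes allocates at most
-- 18*(n+1)+1 ≤ n*36+2 trie nodes for n ≥ 1); they are ported as total maps
-- Nat → value, exact for every in-range access.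
def pvGetBit (t : Nat → Int × Int) (node bit : Int) : Int :=
  if bit = 0 then (t node.toNat).1 else (t node.toNat).2

def pvSetBit (t : Nat → Int × Int) (node bit v : Int) : Nat → Int × Int :=
  fun j => if j = node.toNat then
    (if bit = 0 then (v, (t node.toNat).2) else ((t node.toNat).1, v)) else t j

def pvBump (c : Nat → Int) (i : Int) (dv : Int) : Nat → Int :=
  fun j => if j = i.toNat then c j + dv else c j

structure PvASt where
  trie : Nat → Int × Int
  cnt : Nat → Int
  tidx : Int

-- insert(num): `for i in range(BITS-1, -1, -1)`; d counts the remaining bits (i = d-1)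
def pvInsertGo (num : Int) : Nat → Int → PvASt → PvASt
  | 0, _, st => st
  | d + 1, node, st =>
    let bit := pvBitA num d
    let st1 := if pvGetBit st.trie node bit = 0 then
        { st with trie := pvSetBit st.trie node bit st.tidx, tidx := st.tidx + 1 }
      else st
    let node1 := pvGetBit st1.trie node bit
    pvInsertGo num d node1 { st1 with cnt := pvBump st1.cnt node1 1 }

def pvInsert (num : Int) (st : PvASt) : PvASt := pvInsertGo num 18 0 st

def pvRemoveGo (num : Int) : Nat → Int → PvASt → PvASt
  | 0, _, st => st
  | d + 1, node, st =>
    let node1 := pvGetBit st.trie node (pvBitA num d)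
    pvRemoveGo num d node1 { st with cnt := pvBump st.cnt node1 (-1) }

def pvRemove (num : Int) (st : PvASt) : PvASt := pvRemoveGo num 18 0 st

-- query(num): result |= (1 << i) is `PySem.Int.bor result (2^i)`
def pvQueryGo (num : Int) : Nat → Int → Int → PvASt → Int
  | 0, _, result, _ => result
  | d + 1, node, result, st =>
    let bit := pvBitA num d
    let want := 1 - bit
    if pvGetBit st.trie node want ≠ 0 ∧ 0 < st.cnt (pvGetBit st.trie node want).toNat then
      pvQueryGo num d (pvGetBit st.trie node want) (PySem.Int.bor result ((2 : Int) ^ d)) st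
    else
      pvQueryGo num d (pvGetBit st.trie node bit) result st

def pvQuery (num : Int) (st : PvASt) : Int := pvQueryGo num 18 0 0 st

def pvDfsA (children : PySem.Dict Int (List Int)) (qmap : PySem.Dict Int (List (Int × Int))) :
    Nat → List (Int × Bool) → PvASt → List Int → List Int
  | 0, _, _, ans => ans
  | _ + 1, [], _, ans => ans
  | f + 1, (node, leaving) :: rest, st, ans =>
    if leaving then pvDfsA children qmap f rest (pvRemove node st) ans
    else
      let st1 := pvInsert node st
      let ans1 := (qmap.getD node []).foldl
        (fun a vi => a.set vi.2.toNat (pvQuery vi.1 st1)) ans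
      pvDfsA children qmap f
        ((children.getD node []).foldl (fun s c => (c, false) :: s) ((node, true) :: rest))
        st1 ans1

def maxGeneticDifference (parents : List Int) (queries : List (List Int)) : List Int :=
  let n := parents.length
  -- children / root from `for i, p in enumerate(parents)`
  let cr := (PySem.List.enumerate parents).foldl
    (fun (acc : PySem.Dict Int (List Int) × Int) ip =>
      if ip.2 = -1 then (acc.1, ip.1)
      else (acc.1.insert ip.2 (acc.1.getD ip.2 [] ++ [ip.1]), acc.2))
    (PySem.Dict.empty, -1)
  -- query_map; queries rows have length 2 under Pre_, so q[0]/q[1] are exact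
  let qmap := (PySem.List.enumerate queries).foldl
    (fun (m : PySem.Dict Int (List (Int × Int))) iq =>
      m.insert (iq.2.getD 0 0) (m.getD (iq.2.getD 0 0) [] ++ [(iq.2.getD 1 0, iq.1)]))
    PySem.Dict.empty
  let st0 : PvASt := ⟨fun _ => (0, 0), fun _ => 0, 1⟩
  -- fuel: the while-loop pops at most 2*(n+1) entries (each index enters at most
  -- once, each enter pushes one leave), so 2*n+3 is never exhausted
  pvDfsA cr.1 qmap (2 * n + 3) [(cr.2, false)] st0 (List.replicate queries.length 0)

-- ===== PORT B =====

def pvMaskB : Int := (2 : Int) ^ 18 - 1   -- (1 << 18) - 1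

def pvScore (val a : Int) : Int := PySem.Int.band (PySem.Int.bxor a val) pvMaskB

-- max((a ^ val) & MASK for a in path): Python's max over a nonempty generator
def pvPathMax (val : Int) (path : List Int) : Int :=
  match path with
  | [] => 0   -- never reached: path is nonempty at every call site
  | a :: rest => rest.foldl (fun m b => max m (pvScore val b)) (pvScore val a)

def pvDfsB (parents : List Int) (queries : List (List Int)) :
    Nat → List (Int × Bool) → List Int → List Int → List Int
  | 0, _, _, ans => ans
  | _ + 1, [], _, ans => ans
  | f + 1, (node, leaving) :: rest, path, ans =>
    if leaving then pvDfsB parents queries f rest (path.drop 1) ans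
    else
      -- path kept newest-first (Python appends/pops at the end); the max scanned
      -- below is order-independent
      let path1 := node :: path
      let ans1 := (PySem.List.enumerate queries).foldl
        (fun a iq => if iq.2.getD 0 0 = node then
            a.set iq.1.toNat (pvPathMax (iq.2.getD 1 0) path1) else a) ans
      let stack1 := if node = -1 then (node, true) :: rest
        else (PySem.List.enumerate parents).foldl
          (fun s ip => if ip.2 = node then (ip.1, false) :: s else s) ((node, true) :: rest)
      pvDfsB parents queries f stack1 path1 ans1

def maxGeneticDifference_alt (parents : List Int) (queries : List (List Int)) : List Int :=
  let root := (PySem.List.enumerate parents).foldl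
    (fun r ip => if ip.2 = -1 then ip.1 else r) (-1)
  pvDfsB parents queries (2 * parents.length + 3) [(root, false)] []
    (List.replicate queries.length 0)

-- ===== PRECONDITION & SPEC =====

-- Pre_ excludes exactly the inputs where Python A raises: parents = [] (its trie
-- array of size 2 is too small for the first insert: IndexError) and query rows
-- whose length is not 2 (tuple unpacking raises).
def Pre_maxGeneticDifference (parents : List Int) (queries : List (List Int)) : Prop :=
  parents ≠ [] ∧ ∀ q ∈ queries, q.length = 2

instance (parents : List Int) (queries : List (List Int)) :
    Decidable (Pre_maxGeneticDifference parents queries) := by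
  unfold Pre_maxGeneticDifference; infer_instance

def pvWitness_maxGeneticDifference : List Int × List (List Int) := ([-1], [[0, 3]])

def Spec_maxGeneticDifference (parents : List Int) (queries : List (List Int)) (out : List Int) : Prop := out = maxGeneticDifference_alt parents queries
instance (parents : List Int) (queries : List (List Int)) (out : List Int) : Decidable (Spec_maxGeneticDifference parents queries out) := by unfold Spec_maxGeneticDifference; infer_instance

-- ===== CLAIM (what is proved, stated in full; the proofs are below) =====
def Claim_equal_maxGeneticDifference : Prop := ∀ (parents : List Int) (queries : List (List Int)), Dom_maxGeneticDifference parents queries → Pre_maxGeneticDifference parents queries → Spec_maxGeneticDifference parents queries (maxGeneticDifference parents queries)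

-- ===== LEMMAS AND PROOFS =====

-- ---- Nat bit-level foundations ----

lemma pvM_int : (2 : Int) ^ 18 = 262144 := by norm_num

lemma pvM_nat : (2 : Nat) ^ 18 = 262144 := by norm_num

lemma pv_or_div2 (x y : Nat) : (x ||| y) / 2 = x / 2 ||| y / 2 := by
  apply Nat.eq_of_testBit_eq; intro i
  simp [Nat.testBit_div_two]

lemma pv_and_div2 (x y : Nat) : (x &&& y) / 2 = x / 2 &&& y / 2 := by
  apply Nat.eq_of_testBit_eq; intro i
  simp [Nat.testBit_div_two]

lemma pv_or_disj (a : Nat) : ∀ b : Nat, a &&& b = 0 → a ||| b = a + b := by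
  induction a using Nat.strong_induction_on with
  | _ a ih =>
    intro b h
    rcases Nat.eq_zero_or_pos a with ha | ha
    · subst ha; simp
    · have h2 : a / 2 &&& b / 2 = 0 := by rw [← pv_and_div2, h]
      have ih2 := ih (a / 2) (Nat.div_lt_self ha (by norm_num)) (b / 2) h2
      have hor2 : (a ||| b) / 2 = a / 2 + b / 2 := by rw [pv_or_div2, ih2]
      have hnboth : ¬(a % 2 = 1 ∧ b % 2 = 1) := by
        rintro ⟨h1', h2'⟩
        have hb1 : a.testBit 0 = true := by rw [Nat.testBit_zero]; exact decide_eq_true h1'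
        have hb2 : b.testBit 0 = true := by rw [Nat.testBit_zero]; exact decide_eq_true h2'
        have hab : (a &&& b).testBit 0 = true := by rw [Nat.testBit_land, hb1, hb2]; rfl
        rw [h, Nat.zero_testBit] at hab
        exact Bool.false_ne_true hab
      have hb : (decide ((a ||| b) % 2 = 1) : Bool)
          = (decide (a % 2 = 1) || decide (b % 2 = 1)) := by
        rw [← Nat.testBit_zero, ← Nat.testBit_zero, ← Nat.testBit_zero, Nat.testBit_lor]
      have hmod : (a ||| b) % 2 = a % 2 + b % 2 := by
        rcases Nat.mod_two_eq_zero_or_one a with ha2 | ha2 <;>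
          rcases Nat.mod_two_eq_zero_or_one b with hb2 | hb2
        · have hb' : (a ||| b) % 2 ≠ 1 := by simpa [ha2, hb2] using hb
          omega
        · have hb' : (a ||| b) % 2 = 1 := by simpa [ha2, hb2] using hb
          omega
        · have hb' : (a ||| b) % 2 = 1 := by simpa [ha2, hb2] using hb
          omega
        · exact absurd ⟨ha2, hb2⟩ hnboth
      have hdm := Nat.div_add_mod (a ||| b) 2
      have hda := Nat.div_add_mod a 2
      have hdb := Nat.div_add_mod b 2
      omega

lemma pv_compl {n x : Nat} (hx : x < 2 ^ n) : (2 ^ n - 1) ^^^ x = 2 ^ n - 1 - x := by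
  have hbit : ∀ i, x.testBit i = true → i < n := by
    intro i hi
    by_contra hge
    have hlt : x < 2 ^ i :=
      lt_of_lt_of_le hx (Nat.pow_le_pow_right (by norm_num) (by omega))
    rw [Nat.testBit_lt_two_pow hlt] at hi; exact absurd hi (by simp)
  have hand : x &&& ((2 ^ n - 1) ^^^ x) = 0 := by
    apply Nat.eq_of_testBit_eq; intro i
    simp only [Nat.testBit_land, Nat.testBit_xor, Nat.testBit_two_pow_sub_one, Nat.zero_testBit]
    cases hxi : x.testBit i
    · simp
    · simp [hbit i hxi]
  have hor : x ||| ((2 ^ n - 1) ^^^ x) = 2 ^ n - 1 := by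
    apply Nat.eq_of_testBit_eq; intro i
    simp only [Nat.testBit_lor, Nat.testBit_xor, Nat.testBit_two_pow_sub_one]
    cases hxi : x.testBit i
    · simp
    · simp [hbit i hxi]
  have hsum := pv_or_disj x _ hand
  rw [hor] at hsum
  omega

lemma pv_neg_succ_emod (u M : Int) (hu : 0 ≤ u) (hM : 0 < M) :
    (-u - 1) % M = M - 1 - u % M := by
  have h := Int.ediv_add_emod u M
  have h1 : -u - 1 = (M - 1 - u % M) + M * (-(u / M) - 1) := by linear_combination h
  rw [h1, Int.add_mul_emod_self_left]
  have h2 : 0 ≤ u % M := Int.emod_nonneg u (by omega)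
  have h3 : u % M < M := Int.emod_lt_of_pos u hM
  exact Int.emod_eq_of_lt (by omega) (by omega)

lemma pv_band_mask (z : Int) : PySem.Int.band z ((2 : Int) ^ 18 - 1) = z % (2 : Int) ^ 18 := by
  have hmn : ((2 : Int) ^ 18 - 1).toNat = 2 ^ 18 - 1 := by decide
  by_cases hz : (0 : Int) ≤ z
  · unfold PySem.Int.band
    rw [if_pos hz, if_pos (by norm_num : (0 : Int) ≤ 2 ^ 18 - 1), hmn,
      Nat.and_two_pow_sub_one_eq_mod]
    simp only [pvM_int, pvM_nat]
    omega
  · unfold PySem.Int.band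
    rw [if_neg hz, if_pos (by norm_num : (0 : Int) ≤ 2 ^ 18 - 1), hmn,
      Nat.land_comm, Nat.and_two_pow_sub_one_eq_mod]
    have hu : (0 : Int) ≤ -z - 1 := by omega
    have h2 := pv_neg_succ_emod (-z - 1) ((2 : Int) ^ 18) hu (by norm_num)
    have h3 : -(-z - 1) - 1 = z := by ring
    rw [h3] at h2
    simp only [pvM_int, pvM_nat] at *
    omega

-- ---- patterns ----

def pvPat (x : Int) : Nat := (PySem.Int.mod x ((2 : Int) ^ 18)).toNat

lemma pvPat_cast (x : Int) : (pvPat x : Int) = x % (2 : Int) ^ 18 := by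
  unfold pvPat
  rw [PySem.Int.mod_eq_emod_of_pos (by norm_num)]
  exact Int.toNat_of_nonneg (Int.emod_nonneg x (by norm_num))

lemma pvPat_lt (x : Int) : pvPat x < 2 ^ 18 := by
  have h1 := pvPat_cast x
  have h2 : x % (2 : Int) ^ 18 < 2 ^ 18 := Int.emod_lt_of_pos x (by norm_num)
  simp only [pvM_int, pvM_nat] at *
  omega

lemma pvPat_nonneg_eq (x : Int) (hx : 0 ≤ x) : pvPat x = x.toNat % 2 ^ 18 := by
  have h1 := pvPat_cast x
  simp only [pvM_int, pvM_nat] at *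
  omega

lemma pvPat_neg_eq (x : Int) (hx : x < 0) :
    pvPat x = 2 ^ 18 - 1 - (-x - 1).toNat % 2 ^ 18 := by
  have h1 := pvPat_cast x
  have hu : (0 : Int) ≤ -x - 1 := by omega
  have h2 := pv_neg_succ_emod (-x - 1) ((2 : Int) ^ 18) hu (by norm_num)
  have h3 : -(-x - 1) - 1 = x := by ring
  rw [h3] at h2
  simp only [pvM_int, pvM_nat] at *
  omega

lemma pv_xor4 (m u w : Nat) : (m ^^^ u) ^^^ (m ^^^ w) = u ^^^ w := by
  rw [Nat.xor_comm m u, Nat.xor_assoc, ← Nat.xor_assoc m m w, Nat.xor_self, Nat.zero_xor]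

lemma pvScore_eq (val a : Int) : pvScore val a = ((pvPat a ^^^ pvPat val : Nat) : Int) := by
  unfold pvScore pvMaskB
  rw [pv_band_mask]
  unfold PySem.Int.bxor
  by_cases ha : (0 : Int) ≤ a <;> by_cases hv : (0 : Int) ≤ val
  · rw [if_pos ha, if_pos hv, pvPat_nonneg_eq a ha, pvPat_nonneg_eq val hv,
      ← Nat.xor_mod_two_pow]
    simp only [pvM_int, pvM_nat]
    omega
  · rw [if_pos ha, if_neg hv, pvPat_nonneg_eq a ha, pvPat_neg_eq val (by omega)]
    have hc1 : (2 ^ 18 - 1 : Nat) - (-val - 1).toNat % 2 ^ 18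
        = (2 ^ 18 - 1) ^^^ ((-val - 1).toNat % 2 ^ 18) := by
      rw [pv_compl (Nat.mod_lt _ (by norm_num))]
    rw [hc1, ← Nat.xor_assoc, Nat.xor_comm (a.toNat % 2 ^ 18) (2 ^ 18 - 1), Nat.xor_assoc,
      ← Nat.xor_mod_two_pow, pv_compl (Nat.mod_lt _ (by norm_num))]
    have h2 := pv_neg_succ_emod ((a.toNat ^^^ (-val - 1).toNat : Nat) : Int) ((2 : Int) ^ 18)
      (by positivity) (by norm_num)
    simp only [pvM_int, pvM_nat] at *
    omega
  · rw [if_neg ha, if_pos hv, pvPat_neg_eq a (by omega), pvPat_nonneg_eq val hv]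
    have hc1 : (2 ^ 18 - 1 : Nat) - (-a - 1).toNat % 2 ^ 18
        = (2 ^ 18 - 1) ^^^ ((-a - 1).toNat % 2 ^ 18) := by
      rw [pv_compl (Nat.mod_lt _ (by norm_num))]
    rw [hc1, Nat.xor_assoc, ← Nat.xor_mod_two_pow,
      pv_compl (Nat.mod_lt _ (by norm_num))]
    have h2 := pv_neg_succ_emod (((-a - 1).toNat ^^^ val.toNat : Nat) : Int) ((2 : Int) ^ 18)
      (by positivity) (by norm_num)
    simp only [pvM_int, pvM_nat] at *
    omega
  · rw [if_neg ha, if_neg hv, pvPat_neg_eq a (by omega), pvPat_neg_eq val (by omega)]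
    have hc1 : (2 ^ 18 - 1 : Nat) - (-a - 1).toNat % 2 ^ 18
        = (2 ^ 18 - 1) ^^^ ((-a - 1).toNat % 2 ^ 18) := by
      rw [pv_compl (Nat.mod_lt _ (by norm_num))]
    have hc2 : (2 ^ 18 - 1 : Nat) - (-val - 1).toNat % 2 ^ 18
        = (2 ^ 18 - 1) ^^^ ((-val - 1).toNat % 2 ^ 18) := by
      rw [pv_compl (Nat.mod_lt _ (by norm_num))]
    rw [hc1, hc2, pv_xor4, ← Nat.xor_mod_two_pow]
    simp only [pvM_int, pvM_nat]
    omega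

lemma pvBitA_eq (x : Int) {i : Nat} (h : i < 18) :
    pvBitA x i = if (pvPat x).testBit i then 1 else 0 := by
  unfold pvBitA
  rw [PySem.Int.band_one, PySem.Int.floordiv_eq_ediv_of_pos (by positivity),
    PySem.Int.mod_eq_emod_of_pos (by norm_num)]
  have hx : x = (pvPat x : Int) + (x / 2 ^ 18) * 2 ^ 18 := by
    have h1 := pvPat_cast x
    have h2 := Int.ediv_add_emod x ((2 : Int) ^ 18)
    linear_combination -h2 - h1
  have hsplit : x / (2 : Int) ^ i = (pvPat x : Int) / 2 ^ i + (x / 2 ^ 18) * 2 ^ (18 - i) := by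
    conv_lhs => rw [hx]
    have hpow : ((2 : Int) ^ 18) = 2 ^ (18 - i) * 2 ^ i := by
      rw [← pow_add]; congr 1; omega
    rw [hpow, ← mul_assoc, Int.add_mul_ediv_right _ _ (by positivity : ((2:Int)^i) ≠ 0)]
  have hpow2 : (2 : Int) ^ (18 - i) = 2 ^ (17 - i) * 2 := by
    rw [← pow_succ]; congr 1; omega
  have hmod : x / (2 : Int) ^ i % 2 = (pvPat x : Int) / 2 ^ i % 2 := by
    rw [hsplit]
    have hre : x / (2 : Int) ^ 18 * 2 ^ (18 - i) = 2 * (x / 2 ^ 18 * 2 ^ (17 - i)) := by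
      rw [hpow2]; ring
    rw [hre, Int.add_mul_emod_self_left]
  rw [hmod]
  have hdiv : (pvPat x : Int) / 2 ^ i = ((pvPat x / 2 ^ i : Nat) : Int) := by
    push_cast
    rfl
  have htb : (pvPat x).testBit i = decide (pvPat x / 2 ^ i % 2 = 1) := by
    have h1 : (pvPat x / 2 ^ i).testBit 0 = (pvPat x).testBit (0 + i) :=
      Nat.testBit_div_two_pow _ _
    rw [Nat.zero_add] at h1
    rw [← h1, Nat.testBit_zero]
  rw [hdiv, htb]
  rcases Nat.mod_two_eq_zero_or_one (pvPat x / 2 ^ i) with hm | hm <;> simp [hm] <;> omega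

-- ---- prefixes ----

def pvMatchesAux (m : Nat) : Nat → List Bool → Bool
  | _, [] => true
  | i, b :: bs => (m.testBit (i - 1) == b) && pvMatchesAux m (i - 1) bs

def pvMatches (m : Nat) (p : List Bool) : Bool := pvMatchesAux m 18 p

def pvCount (P : List Nat) (p : List Bool) : Nat := (P.filter fun m => pvMatches m p).length

def pvPath18 (m : Nat) : List Bool := (List.range 18).map fun k => m.testBit (17 - k)

lemma pvMatches_nil (m : Nat) : pvMatches m [] = true := rfl

lemma pvMatchesAux_snoc (m : Nat) : ∀ (p : List Bool) (i : Nat) (c : Bool),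
    pvMatchesAux m i (p ++ [c]) = (pvMatchesAux m i p && (m.testBit (i - p.length - 1) == c)) := by
  intro p
  induction p with
  | nil => intro i c; simp [pvMatchesAux]
  | cons a as ih =>
    intro i c
    simp only [List.cons_append, pvMatchesAux, ih, List.length_cons]
    have harg : i - 1 - as.length - 1 = i - (as.length + 1) - 1 := by omega
    rw [harg, Bool.and_assoc]

lemma pvMatches_snoc (m : Nat) (p : List Bool) (c : Bool) :
    pvMatches m (p ++ [c]) = (pvMatches m p && (m.testBit (17 - p.length) == c)) := by
  unfold pvMatches
  rw [pvMatchesAux_snoc]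
  have harg : 18 - p.length - 1 = 17 - p.length := by omega
  rw [harg]

lemma pvMatchesAux_iff (m : Nat) : ∀ (q : List Bool) (i : Nat),
    pvMatchesAux m i q = true ↔ ∀ k, (h : k < q.length) → q[k] = m.testBit (i - 1 - k) := by
  intro q
  induction q with
  | nil =>
    intro i
    constructor
    · intro _ k hk; simp at hk
    · intro _; rfl
  | cons b bs ih =>
    intro i
    constructor
    · intro hall k hk
      have h1 : (m.testBit (i - 1) == b) = true ∧ pvMatchesAux m (i - 1) bs = true := by
        simpa [pvMatchesAux, Bool.and_eq_true] using hall
      cases k with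
      | zero =>
        simp only [List.getElem_cons_zero, Nat.sub_zero]
        exact (eq_of_beq h1.1).symm
      | succ k' =>
        simp only [List.getElem_cons_succ]
        have hlt : k' < bs.length := by simpa using hk
        have h2 := ((ih (i - 1)).mp h1.2) k' hlt
        have harg : i - 1 - 1 - k' = i - 1 - (k' + 1) := by omega
        rw [harg] at h2
        exact h2
    · intro hall
      have hb : b = m.testBit (i - 1) := by
        have h0 := hall 0 (by simp)
        simpa using h0
      have hbs : pvMatchesAux m (i - 1) bs = true := by
        apply (ih (i - 1)).mpr
        intro k hk
        have h2 := hall (k + 1) (by simpa using Nat.succ_lt_succ hk)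
        simp only [List.getElem_cons_succ] at h2
        have harg : i - 1 - (k + 1) = i - 1 - 1 - k := by omega
        rw [harg] at h2
        exact h2
      simp [pvMatchesAux, hb, hbs]

lemma pvPath18_length : ∀ m : Nat, (pvPath18 m).length = 18 := by
  intro m; simp [pvPath18]

lemma pvPath18_getElem (m : Nat) (k : Nat) (hk : k < (pvPath18 m).length) :
    (pvPath18 m)[k] = m.testBit (17 - k) := by
  simp [pvPath18]

lemma pvMatches_iff_prefix (m : Nat) (q : List Bool) (hq : q.length ≤ 18) :
    pvMatches m q = true ↔ q <+: pvPath18 m := by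
  unfold pvMatches
  rw [pvMatchesAux_iff]
  constructor
  · intro hall
    rw [List.prefix_iff_eq_take]
    apply List.ext_getElem
    · simp [pvPath18_length]; omega
    · intro k h1 h2
      rw [List.getElem_take]
      rw [hall k h1, pvPath18_getElem]
  · intro hpre k hk
    have hqe : q = (pvPath18 m).take q.length := List.prefix_iff_eq_take.mp hpre
    have h2 : q[k] = ((pvPath18 m).take q.length)[k]'(by
        simp [pvPath18_length]; omega) := List.getElem_of_eq hqe hk
    rw [h2, List.getElem_take, pvPath18_getElem]

lemma pvPath18_take_succ (m : Nat) (d : Nat) (hd : d < 18) :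
    (pvPath18 m).take (18 - d) = (pvPath18 m).take (17 - d) ++ [m.testBit d] := by
  have h1 : 18 - d = (17 - d) + 1 := by omega
  rw [h1, List.take_succ]
  congr 1
  have hlt : 17 - d < (pvPath18 m).length := by rw [pvPath18_length]; omega
  rw [List.getElem?_eq_getElem hlt, pvPath18_getElem]
  have h2 : 17 - (17 - d) = d := by omega
  rw [h2]
  rfl

lemma pvCount_cons (x : Nat) (P : List Nat) (p : List Bool) :
    pvCount (x :: P) p = (if pvMatches x p then 1 else 0) + pvCount P p := by
  by_cases hx : pvMatches x p <;> simp [pvCount, List.filter_cons, hx, Nat.add_comm]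

-- ---- the trie invariant ----

def pvFollow (t : Nat → Int × Int) : Int → List Bool → Option Int
  | node, [] => some node
  | node, b :: bs =>
    let c := pvGetBit t node (if b then 1 else 0)
    if c = 0 then none else pvFollow t c bs

lemma pvFollow_snoc (t : Nat → Int × Int) (node : Int) (p : List Bool) (b : Bool) :
    pvFollow t node (p ++ [b]) = (pvFollow t node p).bind
      (fun j => let c := pvGetBit t j (if b then 1 else 0); if c = 0 then none else some c) := by
  induction p generalizing node with
  | nil => simp [pvFollow]
  | cons a as ih =>
    simp only [List.cons_append, pvFollow]
    by_cases hc : pvGetBit t node (if a then 1 else 0) = 0 <;> simp [hc, ih]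

structure PvMid (t : Nat → Int × Int) (c : Nat → Int) (fresh : Int) (P : List Nat)
    (bonus : List Bool → Nat) : Prop where
  one_le : 1 ≤ fresh
  elt_lt : ∀ m ∈ P, m < 2 ^ 18
  pos : ∀ p i, pvFollow t 0 p = some i → 0 ≤ i
  lt_fresh : ∀ p i, p ≠ [] → pvFollow t 0 p = some i → 0 < i ∧ i < fresh
  inj : ∀ p q i, pvFollow t 0 p = some i → pvFollow t 0 q = some i → p = q
  cnt_eq : ∀ p i, p ≠ [] → p.length ≤ 18 → pvFollow t 0 p = some i →
    c i.toNat = pvCount P p + bonus p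
  cnt_none : ∀ p, p.length ≤ 18 → pvFollow t 0 p = none → pvCount P p = 0 ∧ bonus p = 0
  clean : ∀ j : Nat, fresh ≤ (j : Int) → t j = (0, 0) ∧ c j = 0

def PvInv (t : Nat → Int × Int) (c : Nat → Int) (fresh : Int) (P : List Nat) : Prop :=
  PvMid t c fresh P (fun _ => 0)

-- ---- helper lemmas for the operation proofs ----

lemma pvGetBit_set_self (t : Nat → Int × Int) (node : Int) (b : Bool) (v : Int) :
    pvGetBit (pvSetBit t node (if b then 1 else 0) v) node (if b then 1 else 0) = v := by
  cases b <;> simp [pvGetBit, pvSetBit]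

lemma pvGetBit_set_otherbit (t : Nat → Int × Int) (node : Int) (b c : Bool) (v : Int)
    (hbc : c ≠ b) :
    pvGetBit (pvSetBit t node (if b then 1 else 0) v) node (if c then 1 else 0)
      = pvGetBit t node (if c then 1 else 0) := by
  cases b <;> cases c <;> simp_all [pvGetBit, pvSetBit]

lemma pvGetBit_set_othernode (t : Nat → Int × Int) (node node' bit v bit' : Int)
    (h : node'.toNat ≠ node.toNat) :
    pvGetBit (pvSetBit t node bit v) node' bit' = pvGetBit t node' bit' := by
  simp [pvGetBit, pvSetBit, h]

lemma pvFollow_append (t : Nat → Int × Int) (q₁ q₂ : List Bool) :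
    ∀ node, pvFollow t node (q₁ ++ q₂) = (pvFollow t node q₁).bind (fun j => pvFollow t j q₂) := by
  induction q₁ with
  | nil => intro node; simp [pvFollow]
  | cons a as ih =>
    intro node
    simp only [List.cons_append, pvFollow]
    by_cases hc : pvGetBit t node (if a then 1 else 0) = 0 <;> simp [hc, ih]

lemma pvFollow_prefix_some (t : Nat → Int × Int) (q₁ q₂ : List Bool) (i : Int)
    (h : pvFollow t 0 (q₁ ++ q₂) = some i) : ∃ j, pvFollow t 0 q₁ = some j := by
  rw [pvFollow_append] at h
  cases hj : pvFollow t 0 q₁ with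
  | none => rw [hj] at h; simp at h
  | some j => exact ⟨j, rfl⟩

lemma pvMatches_of_prefix {m : Nat} {p₁ p₂ : List Bool} (hpre : p₁ <+: p₂)
    (h : pvMatches m p₂ = true) : pvMatches m p₁ = true := by
  unfold pvMatches at *
  rw [pvMatchesAux_iff] at *
  intro k hk
  obtain ⟨tl, htl⟩ := hpre
  have hk2 : k < p₂.length := by rw [← htl]; simp; omega
  have hval := h k hk2
  have he : p₂[k]'hk2 = (p₁ ++ tl)[k]'(by rw [htl]; exact hk2) :=
    List.getElem_of_eq htl.symm hk2
  have he2 : (p₁ ++ tl)[k]'(by rw [htl]; exact hk2) = p₁[k]'hk :=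
    List.getElem_append_left hk
  rw [he, he2] at hval
  exact hval

lemma pvCount_zero_iff (P : List Nat) (p : List Bool) :
    pvCount P p = 0 ↔ ∀ m ∈ P, pvMatches m p = false := by
  simp [pvCount, List.length_eq_zero_iff, List.filter_eq_nil_iff]

lemma pvCount_zero_of_prefix (P : List Nat) {p₁ p₂ : List Bool} (hpre : p₁ <+: p₂)
    (h : pvCount P p₁ = 0) : pvCount P p₂ = 0 := by
  rw [pvCount_zero_iff] at *
  intro m hm
  by_contra hmt
  have h2 := pvMatches_of_prefix hpre (by simpa using hmt)
  rw [h m hm] at h2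
  exact absurd h2 (by simp)

lemma pvFold_le_init (l : List Nat) : ∀ a : Nat, a ≤ l.foldl max a := by
  induction l with
  | nil => intro a; simp
  | cons x xs ih =>
    intro a
    exact le_trans (Nat.le_max_left a x) (by simpa using ih (max a x))

lemma pvFold_le_of_mem (l : List Nat) : ∀ (a v : Nat), v ∈ l → v ≤ l.foldl max a := by
  induction l with
  | nil => intro a v hv; simp at hv
  | cons x xs ih =>
    intro a v hv
    rcases List.mem_cons.mp hv with h | h
    · subst h
      exact le_trans (Nat.le_max_right a v) (by simpa using pvFold_le_init xs (max a v))
    · simpa using ih (max a x) v h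

lemma pvFold_mem_or (l : List Nat) : ∀ a : Nat, l.foldl max a = a ∨ l.foldl max a ∈ l := by
  induction l with
  | nil => intro a; left; rfl
  | cons x xs ih =>
    intro a
    rcases ih (max a x) with h | h
    · rcases Nat.le_total a x with hax | hax
      · right
        rw [List.foldl_cons, h, Nat.max_eq_right hax]
        exact List.mem_cons_self
      · left
        rw [List.foldl_cons, h, Nat.max_eq_left hax]
    · right
      rw [List.foldl_cons]
      exact List.mem_cons_of_mem _ h

lemma pvFold_ub (l : List Nat) (B : Nat) : ∀ a : Nat, a ≤ B → (∀ v ∈ l, v ≤ B) →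
    l.foldl max a ≤ B := by
  induction l with
  | nil => intro a ha _; simpa using ha
  | cons x xs ih =>
    intro a ha hall
    rw [List.foldl_cons]
    exact ih (max a x) (Nat.max_le.mpr ⟨ha, hall x List.mem_cons_self⟩)
      (fun v hv => hall v (List.mem_cons_of_mem _ hv))

lemma pvMod_succ (z d : Nat) : z % 2 ^ (d + 1) = z % 2 ^ d + 2 ^ d * (z.testBit d).toNat := by
  have h1 : (2 : Nat) ^ (d + 1) = 2 ^ d * 2 := by rw [pow_succ]
  rw [h1, Nat.mod_mul]
  congr 1
  congr 1
  have h2 : (z / 2 ^ d).testBit 0 = z.testBit (0 + d) := Nat.testBit_div_two_pow _ _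
  rw [Nat.zero_add] at h2
  rw [← h2, Nat.testBit_zero]
  rcases Nat.mod_two_eq_zero_or_one (z / 2 ^ d) with hm | hm <;> simp [hm]

lemma pvMax_flat (L : List Nat) (y d : Nat) (b : Bool) (hy : y.testBit d = b)
    (hall : ∀ m ∈ L, m.testBit d = b) :
    (L.map fun m => (m ^^^ y) % 2 ^ (d + 1)).foldl max 0
      = (L.map fun m => (m ^^^ y) % 2 ^ d).foldl max 0 := by
  have hmap : (L.map fun m => (m ^^^ y) % 2 ^ (d + 1))
      = L.map fun m => (m ^^^ y) % 2 ^ d := by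
    apply List.map_congr_left
    intro m hm
    rw [pvMod_succ]
    have hb : (m ^^^ y).testBit d = false := by
      rw [Nat.testBit_xor, hall m hm, hy]
      cases b <;> rfl
    simp [hb]
  rw [hmap]

lemma pvMax_split (L : List Nat) (y d : Nat) (b : Bool) (hy : y.testBit d = b)
    (hW : (L.filter fun m => m.testBit d = !b) ≠ []) :
    (L.map fun m => (m ^^^ y) % 2 ^ (d + 1)).foldl max 0
      = 2 ^ d + ((L.filter fun m => m.testBit d = !b).map fun m => (m ^^^ y) % 2 ^ d).foldl max 0 := by
  have hval_want : ∀ m : Nat, m.testBit d = !b →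
      (m ^^^ y) % 2 ^ (d + 1) = 2 ^ d + (m ^^^ y) % 2 ^ d := by
    intro m hm
    rw [pvMod_succ]
    have hb : (m ^^^ y).testBit d = true := by
      rw [Nat.testBit_xor, hm, hy]
      cases b <;> rfl
    rw [hb]
    simp [Nat.add_comm]
  have hval_other : ∀ m : Nat, m.testBit d = b →
      (m ^^^ y) % 2 ^ (d + 1) = (m ^^^ y) % 2 ^ d := by
    intro m hm
    rw [pvMod_succ]
    have hb : (m ^^^ y).testBit d = false := by
      rw [Nat.testBit_xor, hm, hy]
      cases b <;> rfl
    simp [hb]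
  apply Nat.le_antisymm
  · apply pvFold_ub
    · exact Nat.zero_le _
    · intro v hv
      obtain ⟨m, hm, hveq⟩ := List.mem_map.mp hv
      by_cases hmb : m.testBit d = !b
      · have hlow : (m ^^^ y) % 2 ^ d
            ∈ (L.filter fun m => m.testBit d = !b).map fun m => (m ^^^ y) % 2 ^ d :=
          List.mem_map_of_mem (List.mem_filter.mpr ⟨hm, by simp [hmb]⟩)
        have := pvFold_le_of_mem _ 0 _ hlow
        rw [← hveq, hval_want m hmb]
        omega
      · have hmb2 : m.testBit d = b := by
          cases hb2 : m.testBit d <;> cases b <;> simp_all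
        rw [← hveq, hval_other m hmb2]
        have := Nat.mod_lt (m ^^^ y) (show 0 < 2 ^ d by positivity)
        omega
  · obtain ⟨w0, hw0⟩ := List.exists_mem_of_ne_nil _ hW
    have hw0f := List.mem_filter.mp hw0
    have hw0b : w0.testBit d = !b := by simpa using hw0f.2
    have hw0L : (w0 ^^^ y) % 2 ^ (d + 1) ∈ L.map fun m => (m ^^^ y) % 2 ^ (d + 1) :=
      List.mem_map_of_mem hw0f.1
    have hle0 := pvFold_le_of_mem _ 0 _ hw0L
    rcases pvFold_mem_or ((L.filter fun m => m.testBit d = !b).map fun m => (m ^^^ y) % 2 ^ d) 0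
      with hz | hmem
    · rw [hz]
      rw [hval_want w0 hw0b] at hle0
      omega
    · obtain ⟨m, hmf, hmeq⟩ := List.mem_map.mp hmem
      have hmb : m.testBit d = !b := by simpa using (List.mem_filter.mp hmf).2
      have hfull : (m ^^^ y) % 2 ^ (d + 1) ∈ L.map fun m => (m ^^^ y) % 2 ^ (d + 1) :=
        List.mem_map_of_mem (List.mem_filter.mp hmf).1
      have hle1 := pvFold_le_of_mem _ 0 _ hfull
      rw [hval_want m hmb, hmeq] at hle1
      exact hle1

lemma pvBor_pow (r d : Nat) (hr : r % 2 ^ (d + 1) = 0) :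
    PySem.Int.bor (r : Int) ((2 : Int) ^ d) = ((r + 2 ^ d : Nat) : Int) := by
  have h2 : ((2 : Int) ^ d) = ((2 ^ d : Nat) : Int) := by push_cast; rfl
  rw [h2, PySem.Int.bor_natCast]
  congr 1
  have htb : r.testBit d = false := by
    have h3 := Nat.testBit_mod_two_pow r (d + 1) d
    rw [hr, Nat.zero_testBit] at h3
    simpa using h3.symm
  have hand : r &&& 2 ^ d = 0 := by rw [Nat.and_two_pow, htb]; simp
  exact pv_or_disj r _ hand

lemma pvWant_eq (x : Int) {d : Nat} (h : d < 18) :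
    1 - pvBitA x d = if !(pvPat x).testBit d then 1 else 0 := by
  rw [pvBitA_eq x h]
  cases (pvPat x).testBit d <;> norm_num

-- ---- operation lemmas ----

lemma pvFollow_set_agree (t : Nat → Int × Int) (π : List Bool) (node : Int) (b : Bool) (v : Int)
    (hnode : pvFollow t 0 π = some node)
    (hpos : ∀ p i, pvFollow t 0 p = some i → 0 ≤ i)
    (hinj : ∀ p q i, pvFollow t 0 p = some i → pvFollow t 0 q = some i → p = q) :
    ∀ (r qpre : List Bool) (node₁ : Int), pvFollow t 0 qpre = some node₁ →
      ¬ ((π ++ [b]) <+: (qpre ++ r)) →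
      pvFollow (pvSetBit t node (if b then 1 else 0) v) node₁ r = pvFollow t node₁ r := by
  intro r
  induction r with
  | nil => intro qpre node₁ _ _; rfl
  | cons c cs ih =>
    intro qpre node₁ hq hnp
    simp only [pvFollow]
    have hstep : pvGetBit (pvSetBit t node (if b then 1 else 0) v) node₁ (if c then 1 else 0)
        = pvGetBit t node₁ (if c then 1 else 0) := by
      by_cases hn : node₁.toNat = node.toNat
      · have h1 := hpos _ _ hq
        have h2 := hpos _ _ hnode
        have hnn : node₁ = node := by omega
        subst hnn
        have hqπ : qpre = π := hinj _ _ _ hq hnode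
        subst hqπ
        have hcb : c ≠ b := by
          intro hcb
          subst hcb
          exact hnp ⟨cs, by simp⟩
        exact pvGetBit_set_otherbit t node₁ b c v hcb
      · exact pvGetBit_set_othernode t node node₁ _ v _ hn
    rw [hstep]
    by_cases hc0 : pvGetBit t node₁ (if c then 1 else 0) = 0
    · simp [hc0]
    · simp only [hc0, if_neg hc0]
      apply ih (qpre ++ [c])
      · rw [pvFollow_snoc, hq]
        simp [hc0]
      · intro hpre
        apply hnp
        rw [List.append_assoc] at hpre
        simpa using hpre

lemma pvMid_bonus_ext {t : Nat → Int × Int} {c : Nat → Int} {f : Int} {P : List Nat}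
    {b1 b2 : List Bool → Nat} (h : PvMid t c f P b1)
    (heq : ∀ q : List Bool, q ≠ [] → q.length ≤ 18 → b1 q = b2 q) : PvMid t c f P b2 := by
  refine ⟨h.one_le, h.elt_lt, h.pos, h.lt_fresh, h.inj, ?_, ?_, h.clean⟩
  · intro q i hq hlen hf
    rw [← heq q hq hlen]
    exact h.cnt_eq q i hq hlen hf
  · intro q hlen hf
    have hq : q ≠ [] := by
      intro he
      subst he
      simp [pvFollow] at hf
    obtain ⟨h1, h2⟩ := h.cnt_none q hlen hf
    exact ⟨h1, by rw [← heq q hq hlen]; exact h2⟩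

lemma pvTake_prefix_matches (m : Nat) (k : Nat) :
    pvMatches m ((pvPath18 m).take k) = true := by
  apply pvMatches_of_prefix (List.take_prefix k (pvPath18 m))
  exact (pvMatches_iff_prefix m (pvPath18 m) (by rw [pvPath18_length])).mpr List.prefix_rfl

lemma pvTake_len (m : Nat) (k : Nat) (hk : k ≤ 18) :
    ((pvPath18 m).take k).length = k := by
  rw [List.length_take, pvPath18_length]
  omega

-- a cnt bump at the node of a followable prefix, adjusting the bonus there
lemma pvMid_bump {t : Nat → Int × Int} {c : Nat → Int} {f : Int} {P : List Nat}
    {b1 b2 : List Bool → Nat} (w : Int) (π' : List Bool) (dv : Int)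
    (h : PvMid t c f P b1)
    (hfw : pvFollow t 0 π' = some w)
    (hπ'ne : π' ≠ []) (hπ'len : π'.length ≤ 18)
    (hval : (b2 π' : Int) = (b1 π' : Int) + dv)
    (hoth : ∀ q, q ≠ π' → b2 q = b1 q) :
    PvMid t (pvBump c w dv) f P b2 := by
  have hwpos : 0 ≤ w := h.pos _ _ hfw
  have hwlt : w < f := (h.lt_fresh _ _ hπ'ne hfw).2
  refine ⟨h.one_le, h.elt_lt, h.pos, h.lt_fresh, h.inj, ?_, ?_, ?_⟩
  · intro q i hq hlen hfq
    have hipos : 0 ≤ i := h.pos _ _ hfq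
    have hc1 := h.cnt_eq q i hq hlen hfq
    by_cases hqπ : q = π'
    · subst hqπ
      have hiw : i = w := Option.some.inj (hfq.symm.trans hfw)
      subst hiw
      unfold pvBump
      rw [if_pos rfl, hc1]
      have hv2 := hval
      push_cast at hv2 ⊢
      omega
    · have hiw : i ≠ w := fun he => hqπ (h.inj _ _ _ hfq (he ▸ hfw))
      have htn : i.toNat ≠ w.toNat := by omega
      unfold pvBump
      rw [if_neg htn, hc1, hoth q hqπ]
  · intro q hlen hfq
    obtain ⟨h1, h2⟩ := h.cnt_none q hlen hfq
    have hqπ : q ≠ π' := by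
      intro he
      subst he
      rw [hfw] at hfq
      simp at hfq
    exact ⟨h1, by rw [hoth q hqπ]; exact h2⟩
  · intro j hj
    obtain ⟨h1, h2⟩ := h.clean j hj
    refine ⟨h1, ?_⟩
    unfold pvBump
    rw [if_neg (by omega), h2]

lemma pvInsertGo_inv (x : Int) (P : List Nat) :
    ∀ (d : Nat), d ≤ 18 → ∀ (st : PvASt) (node : Int),
      pvFollow st.trie 0 ((pvPath18 (pvPat x)).take (18 - d)) = some node →
      PvMid st.trie st.cnt st.tidx P
        (fun q => if q ≠ [] ∧ q <+: (pvPath18 (pvPat x)).take (18 - d) then 1 else 0) →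
      PvMid (pvInsertGo x d node st).trie (pvInsertGo x d node st).cnt
        (pvInsertGo x d node st).tidx P
        (fun q => if q ≠ [] ∧ q <+: pvPath18 (pvPat x) then 1 else 0) := by
  intro d
  induction d with
  | zero =>
    intro _ st node _ hMid
    have htake : (pvPath18 (pvPat x)).take (18 - 0) = pvPath18 (pvPat x) :=
      List.take_of_length_le (by rw [pvPath18_length])
    rw [htake] at hMid
    simpa [pvInsertGo] using hMid
  | succ d ih =>
    intro hd1 st node hf hMid
    have hd : d < 18 := by omega
    have h17 : 18 - (d + 1) = 17 - d := by omega
    rw [h17] at hf hMid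
    have htake := pvPath18_take_succ (pvPat x) d hd
    have hπlen : ((pvPath18 (pvPat x)).take (17 - d)).length = 17 - d :=
      pvTake_len _ _ (by omega)
    have hπ'len : (((pvPath18 (pvPat x)).take (17 - d)) ++ [(pvPat x).testBit d]).length
        = 18 - d := by
      simp [hπlen]; omega
    have hπ'npre : ¬ (((pvPath18 (pvPat x)).take (17 - d)) ++ [(pvPat x).testBit d])
        <+: ((pvPath18 (pvPat x)).take (17 - d)) := by
      intro hp
      have := hp.length_le
      rw [hπ'len, hπlen] at this
      omega
    by_cases hz : pvGetBit st.trie node (if (pvPat x).testBit d then 1 else 0) = 0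
    · -- allocate a fresh node
      have hnodepos : 0 ≤ node := hMid.pos _ _ hf
      have hnodelt : node < st.tidx := by
        by_cases hπnil : (pvPath18 (pvPat x)).take (17 - d) = []
        · rw [hπnil] at hf
          simp only [pvFollow, Option.some.injEq] at hf
          have := hMid.one_le
          omega
        · exact (hMid.lt_fresh _ _ hπnil hf).2
      have hFpos : 0 < st.tidx := by have := hMid.one_le; omega
      have hclean := hMid.clean st.tidx.toNat (by omega)
      have hFne : st.tidx.toNat ≠ node.toNat := by omega
      have hunfold : pvInsertGo x (d + 1) node st
          = pvInsertGo x d st.tidx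
              ⟨pvSetBit st.trie node (if (pvPat x).testBit d then 1 else 0) st.tidx,
               pvBump st.cnt st.tidx 1, st.tidx + 1⟩ := by
        simp only [pvInsertGo]
        rw [pvBitA_eq x hd, if_pos hz, pvGetBit_set_self]
      rw [hunfold]
      have hagree0 : ∀ q : List Bool,
          ¬ ((((pvPath18 (pvPat x)).take (17 - d)) ++ [(pvPat x).testBit d]) <+: q) →
          pvFollow (pvSetBit st.trie node (if (pvPat x).testBit d then 1 else 0) st.tidx) 0 q
            = pvFollow st.trie 0 q := by
        intro q hq
        exact pvFollow_set_agree st.trie _ node _ st.tidx hf hMid.pos hMid.inj q [] 0 rfl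
          (by simpa using hq)
      have hfπ' : pvFollow (pvSetBit st.trie node (if (pvPat x).testBit d then 1 else 0) st.tidx)
          0 (((pvPath18 (pvPat x)).take (17 - d)) ++ [(pvPat x).testBit d]) = some st.tidx := by
        rw [pvFollow_snoc, hagree0 _ hπ'npre, hf]
        have hself := pvGetBit_set_self st.trie node ((pvPat x).testBit d) st.tidx
        simp [hself]
        omega
      have ht'F : pvSetBit st.trie node (if (pvPat x).testBit d then 1 else 0) st.tidx
          st.tidx.toNat = (0, 0) := by
        unfold pvSetBit
        rw [if_neg hFne]
        exact hclean.1
      have hC : ∀ rest : List Bool, rest ≠ [] →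
          pvFollow (pvSetBit st.trie node (if (pvPat x).testBit d then 1 else 0) st.tidx) 0
            ((((pvPath18 (pvPat x)).take (17 - d)) ++ [(pvPat x).testBit d]) ++ rest) = none := by
        intro rest hrest
        rw [pvFollow_append, hfπ']
        cases rest with
        | nil => exact absurd rfl hrest
        | cons cc cs =>
          simp only [Option.bind_some, pvFollow]
          have : pvGetBit (pvSetBit st.trie node (if (pvPat x).testBit d then 1 else 0) st.tidx)
              st.tidx (if cc then 1 else 0) = 0 := by
            unfold pvGetBit
            rw [ht'F]
            cases cc <;> simp
          simp [this]
      have hfnone : pvFollow st.trie 0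
          (((pvPath18 (pvPat x)).take (17 - d)) ++ [(pvPat x).testBit d]) = none := by
        rw [pvFollow_snoc, hf]
        simp [hz]
      have htri : ∀ q : List Bool,
          ¬ ((((pvPath18 (pvPat x)).take (17 - d)) ++ [(pvPat x).testBit d]) <+: q) ∨
          q = (((pvPath18 (pvPat x)).take (17 - d)) ++ [(pvPat x).testBit d]) ∨
          (∃ rest, rest ≠ [] ∧
            q = ((((pvPath18 (pvPat x)).take (17 - d)) ++ [(pvPat x).testBit d]) ++ rest)) := by
        intro q
        by_cases hp : (((pvPath18 (pvPat x)).take (17 - d)) ++ [(pvPat x).testBit d]) <+: q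
        · obtain ⟨rest, hrest⟩ := hp
          cases hre : rest with
          | nil =>
            right; left
            rw [hre] at hrest
            simpa using hrest.symm
          | cons rc rcs =>
            right; right
            exact ⟨rest, by simp [hre], by rw [hrest]⟩
        · left; exact hp
      have hsome : ∀ (q : List Bool) (i : Int),
          pvFollow (pvSetBit st.trie node (if (pvPat x).testBit d then 1 else 0) st.tidx) 0 q
            = some i →
          (pvFollow st.trie 0 q = some i ∧
            ¬ ((((pvPath18 (pvPat x)).take (17 - d)) ++ [(pvPat x).testBit d]) <+: q)) ∨
          (q = (((pvPath18 (pvPat x)).take (17 - d)) ++ [(pvPat x).testBit d]) ∧ i = st.tidx) := by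
        intro q i hfq
        rcases htri q with hA | hB | ⟨rest, hrne, hre⟩
        · left
          rw [hagree0 q hA] at hfq
          exact ⟨hfq, hA⟩
        · right
          subst hB
          rw [hfπ'] at hfq
          exact ⟨rfl, (Option.some.inj hfq).symm⟩
        · subst hre
          rw [hC rest hrne] at hfq
          exact absurd hfq (by simp)
      have hlt_all : ∀ (p : List Bool) (i : Int), pvFollow st.trie 0 p = some i → i < st.tidx := by
        intro p i hp
        cases p with
        | nil =>
          simp only [pvFollow, Option.some.injEq] at hp
          omega
        | cons cc cs => exact (hMid.lt_fresh _ _ (by simp) hp).2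
      have hcountπ' : pvCount P (((pvPath18 (pvPat x)).take (17 - d)) ++ [(pvPat x).testBit d])
          = 0 := (hMid.cnt_none _ (by rw [hπ'len]; omega) hfnone).1
      have hMid' : PvMid
          (pvSetBit st.trie node (if (pvPat x).testBit d then 1 else 0) st.tidx)
          (pvBump st.cnt st.tidx 1) (st.tidx + 1) P
          (fun q => if q ≠ [] ∧
            q <+: (((pvPath18 (pvPat x)).take (17 - d)) ++ [(pvPat x).testBit d])
            then 1 else 0) := by
        refine ⟨by have := hMid.one_le; omega, hMid.elt_lt, ?_, ?_, ?_, ?_, ?_, ?_⟩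
        · intro q i hfq
          rcases hsome q i hfq with ⟨hold, _⟩ | ⟨_, hi⟩
          · exact hMid.pos _ _ hold
          · omega
        · intro q i hq hfq
          rcases hsome q i hfq with ⟨hold, _⟩ | ⟨_, hi⟩
          · have h1 := hMid.lt_fresh _ _ hq hold
            exact ⟨h1.1, by omega⟩
          · omega
        · intro p q i hp hq
          rcases hsome p i hp with ⟨holdp, _⟩ | ⟨hpe, hie⟩ <;>
            rcases hsome q i hq with ⟨holdq, _⟩ | ⟨hqe, hie2⟩
          · exact hMid.inj _ _ _ holdp holdq
          · exact absurd (hie2 ▸ hlt_all _ _ holdp) (by omega)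
          · exact absurd (hie ▸ hlt_all _ _ holdq) (by omega)
          · rw [hpe, hqe]
        · intro q i hq hlen hfq
          rcases hsome q i hfq with ⟨hold, hnpre⟩ | ⟨hqe, hie⟩
          · have hipos : 0 ≤ i := hMid.pos _ _ hold
            have hilt : i < st.tidx := hlt_all _ _ hold
            have hc1 := hMid.cnt_eq q i hq hlen hold
            unfold pvBump
            rw [if_neg (by omega), hc1]
            have hqπ' : q ≠ (((pvPath18 (pvPat x)).take (17 - d)) ++ [(pvPat x).testBit d]) := by
              intro he
              subst he
              exact hnpre List.prefix_rfl
            by_cases hqp : q <+: ((pvPath18 (pvPat x)).take (17 - d))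
            · have hqp' : q <+: (((pvPath18 (pvPat x)).take (17 - d)) ++ [(pvPat x).testBit d]) :=
                hqp.trans ⟨[(pvPat x).testBit d], rfl⟩
              rw [if_pos ⟨hq, hqp⟩, if_pos ⟨hq, hqp'⟩]
            · have hnq' : ¬ q <+: (((pvPath18 (pvPat x)).take (17 - d)) ++ [(pvPat x).testBit d]) := by
                intro hp2
                rcases List.prefix_concat_iff.mp hp2 with he | hp3
                · exact hqπ' he
                · exact hqp hp3
              rw [if_neg (by tauto), if_neg (by tauto)]
          · subst hqe
            subst hie
            unfold pvBump
            rw [if_pos rfl, hclean.2, hcountπ', if_pos ⟨hq, List.prefix_rfl⟩]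
            norm_num
        · intro q hlen hfq
          rcases htri q with hA | hB | ⟨rest, hrne, hre⟩
          · rw [hagree0 q hA] at hfq
            obtain ⟨h1, _⟩ := hMid.cnt_none q hlen hfq
            refine ⟨h1, ?_⟩
            have hqπ' : q ≠ (((pvPath18 (pvPat x)).take (17 - d)) ++ [(pvPat x).testBit d]) := by
              intro he
              subst he
              exact hA List.prefix_rfl
            have hnqp : ¬ q <+: ((pvPath18 (pvPat x)).take (17 - d)) := by
              intro hp2
              obtain ⟨s, hs⟩ := hp2
              obtain ⟨j, hj⟩ := pvFollow_prefix_some st.trie q s node (by rw [hs]; exact hf)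
              rw [hj] at hfq
              simp at hfq
            have hnq' : ¬ q <+: (((pvPath18 (pvPat x)).take (17 - d)) ++ [(pvPat x).testBit d]) := by
              intro hp2
              rcases List.prefix_concat_iff.mp hp2 with he | hp3
              · exact hqπ' he
              · exact hnqp hp3
            rw [if_neg (by tauto)]
          · subst hB
            rw [hfπ'] at hfq
            exact absurd hfq (by simp)
          · subst hre
            refine ⟨pvCount_zero_of_prefix P ⟨rest, rfl⟩ hcountπ', ?_⟩
            have hnq' : ¬ ((((pvPath18 (pvPat x)).take (17 - d)) ++ [(pvPat x).testBit d]) ++ rest)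
                <+: (((pvPath18 (pvPat x)).take (17 - d)) ++ [(pvPat x).testBit d]) := by
              intro hp2
              have h1 := hp2.length_le
              rw [List.length_append, hπ'len] at h1
              have h2 : 0 < rest.length := List.length_pos_iff.mpr hrne
              omega
            rw [if_neg (by tauto)]
        · intro j hj
          obtain ⟨h1, h2⟩ := hMid.clean j (by omega)
          constructor
          · unfold pvSetBit
            rw [if_neg (by omega), h1]
          · unfold pvBump
            rw [if_neg (by omega), h2]
      have hres := ih (by omega)
        ⟨pvSetBit st.trie node (if (pvPat x).testBit d then 1 else 0) st.tidx,
         pvBump st.cnt st.tidx 1, st.tidx + 1⟩ st.tidx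
        (by rw [htake]; exact hfπ') (by simp only [htake]; exact hMid')
      exact hres
    · -- pointer already there: just bump the count
      have hunfold : pvInsertGo x (d + 1) node st
          = pvInsertGo x d (pvGetBit st.trie node (if (pvPat x).testBit d then 1 else 0))
              ⟨st.trie,
               pvBump st.cnt (pvGetBit st.trie node (if (pvPat x).testBit d then 1 else 0)) 1,
               st.tidx⟩ := by
        simp only [pvInsertGo]
        rw [pvBitA_eq x hd, if_neg hz]
      rw [hunfold]
      have hfπ' : pvFollow st.trie 0
          (((pvPath18 (pvPat x)).take (17 - d)) ++ [(pvPat x).testBit d])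
          = some (pvGetBit st.trie node (if (pvPat x).testBit d then 1 else 0)) := by
        rw [pvFollow_snoc, hf]
        simp [hz]
      have hMid' := pvMid_bump (b2 := fun q => if q ≠ [] ∧
          q <+: (((pvPath18 (pvPat x)).take (17 - d)) ++ [(pvPat x).testBit d]) then 1 else 0)
        (pvGetBit st.trie node (if (pvPat x).testBit d then 1 else 0))
        (((pvPath18 (pvPat x)).take (17 - d)) ++ [(pvPat x).testBit d]) 1 hMid hfπ'
        (by simp) (by rw [hπ'len]; omega)
        (by
          beta_reduce
          rw [if_pos ⟨by simp, List.prefix_rfl⟩, if_neg (by tauto)]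
          norm_num)
        (by
          intro q hqπ'
          beta_reduce
          by_cases hq : q = ([] : List Bool)
          · subst hq; simp
          · by_cases hqp : q <+: ((pvPath18 (pvPat x)).take (17 - d))
            · have hqp' : q <+: (((pvPath18 (pvPat x)).take (17 - d)) ++ [(pvPat x).testBit d]) :=
                hqp.trans ⟨[(pvPat x).testBit d], rfl⟩
              rw [if_pos ⟨hq, hqp'⟩, if_pos ⟨hq, hqp⟩]
            · have hnq' : ¬ q <+: (((pvPath18 (pvPat x)).take (17 - d)) ++ [(pvPat x).testBit d]) := by
                intro hp2
                rcases List.prefix_concat_iff.mp hp2 with he | hp3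
                · exact hqπ' he
                · exact hqp hp3
              rw [if_neg (by tauto), if_neg (by tauto)])
      exact ih (by omega) _ _ (by rw [htake]; exact hfπ') (by simp only [htake]; exact hMid')

lemma pvRemoveGo_inv (x : Int) (P : List Nat) :
    ∀ (d : Nat), d ≤ 18 → ∀ (st : PvASt) (node : Int),
      pvFollow st.trie 0 ((pvPath18 (pvPat x)).take (18 - d)) = some node →
      PvMid st.trie st.cnt st.tidx P
        (fun q => if pvMatches (pvPat x) q ∧ ¬(q <+: (pvPath18 (pvPat x)).take (18 - d))
          then 1 else 0) →
      PvMid (pvRemoveGo x d node st).trie (pvRemoveGo x d node st).cnt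
        (pvRemoveGo x d node st).tidx P
        (fun q => if pvMatches (pvPat x) q ∧ ¬(q <+: pvPath18 (pvPat x)) then 1 else 0) := by
  intro d
  induction d with
  | zero =>
    intro _ st node _ hMid
    have htake : (pvPath18 (pvPat x)).take (18 - 0) = pvPath18 (pvPat x) :=
      List.take_of_length_le (by rw [pvPath18_length])
    rw [htake] at hMid
    simpa [pvRemoveGo] using hMid
  | succ d ih =>
    intro hd1 st node hf hMid
    have hd : d < 18 := by omega
    have h17 : 18 - (d + 1) = 17 - d := by omega
    rw [h17] at hf hMid
    have htake := pvPath18_take_succ (pvPat x) d hd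
    have hπlen : ((pvPath18 (pvPat x)).take (17 - d)).length = 17 - d :=
      pvTake_len _ _ (by omega)
    have hπ'len : (((pvPath18 (pvPat x)).take (17 - d)) ++ [(pvPat x).testBit d]).length
        = 18 - d := by
      simp [hπlen]; omega
    have hπ'npre : ¬ (((pvPath18 (pvPat x)).take (17 - d)) ++ [(pvPat x).testBit d])
        <+: ((pvPath18 (pvPat x)).take (17 - d)) := by
      intro hp
      have := hp.length_le
      rw [hπ'len, hπlen] at this
      omega
    have hmatchπ' : pvMatches (pvPat x)
        (((pvPath18 (pvPat x)).take (17 - d)) ++ [(pvPat x).testBit d]) = true := by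
      rw [← htake]
      exact pvTake_prefix_matches (pvPat x) (18 - d)
    have hch : pvGetBit st.trie node (if (pvPat x).testBit d then 1 else 0) ≠ 0 := by
      intro h0
      have hfnone : pvFollow st.trie 0
          (((pvPath18 (pvPat x)).take (17 - d)) ++ [(pvPat x).testBit d]) = none := by
        rw [pvFollow_snoc, hf]
        simp [h0]
      have h1 := (hMid.cnt_none _ (by rw [hπ'len]; omega) hfnone).2
      rw [if_pos ⟨hmatchπ', hπ'npre⟩] at h1
      omega
    have hunfold : pvRemoveGo x (d + 1) node st
        = pvRemoveGo x d (pvGetBit st.trie node (if (pvPat x).testBit d then 1 else 0))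
            ⟨st.trie,
             pvBump st.cnt (pvGetBit st.trie node (if (pvPat x).testBit d then 1 else 0)) (-1),
             st.tidx⟩ := by
      simp only [pvRemoveGo]
      rw [pvBitA_eq x hd]
    rw [hunfold]
    have hfπ' : pvFollow st.trie 0
        (((pvPath18 (pvPat x)).take (17 - d)) ++ [(pvPat x).testBit d])
        = some (pvGetBit st.trie node (if (pvPat x).testBit d then 1 else 0)) := by
      rw [pvFollow_snoc, hf]
      simp [hch]
    have hMid' := pvMid_bump (b2 := fun q => if pvMatches (pvPat x) q ∧
        ¬(q <+: (((pvPath18 (pvPat x)).take (17 - d)) ++ [(pvPat x).testBit d])) then 1 else 0)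
      (pvGetBit st.trie node (if (pvPat x).testBit d then 1 else 0))
      (((pvPath18 (pvPat x)).take (17 - d)) ++ [(pvPat x).testBit d]) (-1) hMid hfπ'
      (by simp) (by rw [hπ'len]; omega)
      (by
        beta_reduce
        rw [if_neg (by
          rintro ⟨-, hnp⟩
          exact hnp List.prefix_rfl), if_pos ⟨hmatchπ', hπ'npre⟩]
        norm_num)
      (by
        intro q hqπ'
        beta_reduce
        by_cases hqp : q <+: ((pvPath18 (pvPat x)).take (17 - d))
        · have hqp' : q <+: (((pvPath18 (pvPat x)).take (17 - d)) ++ [(pvPat x).testBit d]) :=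
            hqp.trans ⟨[(pvPat x).testBit d], rfl⟩
          rw [if_neg (by rintro ⟨-, hnp⟩; exact hnp hqp'), if_neg (by rintro ⟨-, hnp⟩; exact hnp hqp)]
        · have hnq' : ¬ q <+: (((pvPath18 (pvPat x)).take (17 - d)) ++ [(pvPat x).testBit d]) := by
            intro hp2
            rcases List.prefix_concat_iff.mp hp2 with he | hp3
            · exact hqπ' he
            · exact hqp hp3
          by_cases hm : pvMatches (pvPat x) q = true
          · rw [if_pos ⟨hm, hnq'⟩, if_pos ⟨hm, hqp⟩]
          · rw [if_neg (by tauto), if_neg (by tauto)])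
    exact ih (by omega) _ _ (by rw [htake]; exact hfπ') (by simp only [htake]; exact hMid')

lemma pvInsert_inv (x : Int) (st : PvASt) (P : List Nat)
    (h : PvInv st.trie st.cnt st.tidx P) :
    PvInv (pvInsert x st).trie (pvInsert x st).cnt (pvInsert x st).tidx (pvPat x :: P) := by
  have hM : PvMid st.trie st.cnt st.tidx P (fun _ => 0) := h
  have hMid0 : PvMid st.trie st.cnt st.tidx P
      (fun q => if q ≠ [] ∧ q <+: (pvPath18 (pvPat x)).take (18 - 18) then 1 else 0) :=
    pvMid_bonus_ext hM (fun q hq _ => by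
      rw [if_neg (by
        rintro ⟨-, hp⟩
        rw [show (18 : Nat) - 18 = 0 from rfl, List.take_zero] at hp
        exact hq (List.prefix_nil.mp hp))])
  have h0 : pvFollow st.trie 0 ((pvPath18 (pvPat x)).take (18 - 18)) = some 0 := rfl
  have h1 := pvInsertGo_inv x P 18 le_rfl st 0 h0 hMid0
  unfold PvInv pvInsert
  refine ⟨h1.one_le, ?_, h1.pos, h1.lt_fresh, h1.inj, ?_, ?_, h1.clean⟩
  · intro m hm
    rcases List.mem_cons.mp hm with he | hm2
    · subst he; exact pvPat_lt x
    · exact h1.elt_lt m hm2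
  · intro q i hq hlen hfq
    have hc := h1.cnt_eq q i hq hlen hfq
    rw [hc, pvCount_cons]
    by_cases hm : pvMatches (pvPat x) q = true
    · have hpre := (pvMatches_iff_prefix _ q hlen).mp hm
      rw [if_pos ⟨hq, hpre⟩, if_pos hm]
      push_cast
      omega
    · have hnpre : ¬ q <+: pvPath18 (pvPat x) := fun hp =>
        hm ((pvMatches_iff_prefix _ q hlen).mpr hp)
      rw [if_neg (by tauto), if_neg hm]
      push_cast
      omega
  · intro q hlen hfq
    obtain ⟨h1c, h2c⟩ := h1.cnt_none q hlen hfq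
    have hq : q ≠ [] := fun he => by subst he; simp [pvFollow] at hfq
    have hm : pvMatches (pvPat x) q = false := by
      by_contra hmt
      have hmt' : pvMatches (pvPat x) q = true := by
        cases hmm : pvMatches (pvPat x) q
        · exact absurd hmm hmt
        · rfl
      have hpre := (pvMatches_iff_prefix _ q hlen).mp hmt'
      rw [if_pos ⟨hq, hpre⟩] at h2c
      omega
    refine ⟨?_, rfl⟩
    rw [pvCount_cons, hm]
    simpa using h1c

lemma pvRemove_inv (x : Int) (st : PvASt) (P : List Nat)
    (h : PvInv st.trie st.cnt st.tidx (pvPat x :: P)) :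
    PvInv (pvRemove x st).trie (pvRemove x st).cnt (pvRemove x st).tidx P := by
  have hM : PvMid st.trie st.cnt st.tidx (pvPat x :: P) (fun _ => 0) := h
  have hMid0 : PvMid st.trie st.cnt st.tidx P
      (fun q => if pvMatches (pvPat x) q ∧ ¬(q <+: (pvPath18 (pvPat x)).take (18 - 18))
        then 1 else 0) := by
    refine ⟨hM.one_le, fun m hm => hM.elt_lt m (List.mem_cons_of_mem _ hm), hM.pos,
      hM.lt_fresh, hM.inj, ?_, ?_, hM.clean⟩
    · intro q i hq hlen hfq
      have hc := hM.cnt_eq q i hq hlen hfq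
      rw [pvCount_cons] at hc
      have hnp : ¬ (q <+: (pvPath18 (pvPat x)).take (18 - 18)) := by
        rw [show (18 : Nat) - 18 = 0 from rfl, List.take_zero]
        intro hp
        exact hq (List.prefix_nil.mp hp)
      rw [hc]
      by_cases hm : pvMatches (pvPat x) q = true
      · rw [if_pos hm, if_pos ⟨hm, hnp⟩]
        push_cast
        omega
      · have hmf : pvMatches (pvPat x) q = false := by
          cases hmm : pvMatches (pvPat x) q
          · rfl
          · exact absurd hmm hm
        rw [if_neg hm, if_neg (by tauto)]
        push_cast
        omega
    · intro q hlen hfq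
      obtain ⟨h1c, -⟩ := hM.cnt_none q hlen hfq
      rw [pvCount_cons] at h1c
      have hm : pvMatches (pvPat x) q = false := by
        cases hmm : pvMatches (pvPat x) q
        · rfl
        · rw [hmm] at h1c; simp at h1c
      rw [hm] at h1c
      refine ⟨by simpa using h1c, ?_⟩
      rw [if_neg (by simp [hm])]
  have h0 : pvFollow st.trie 0 ((pvPath18 (pvPat x)).take (18 - 18)) = some 0 := rfl
  have h1 := pvRemoveGo_inv x P 18 le_rfl st 0 h0 hMid0
  exact pvMid_bonus_ext h1 (fun q hq hlen => by
    by_cases hm : pvMatches (pvPat x) q = true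
    · have hpre := (pvMatches_iff_prefix _ q hlen).mp hm
      rw [if_neg (by rintro ⟨-, hnp⟩; exact hnp hpre)]
    · rw [if_neg (by tauto)])

lemma pvQueryGo_eq (x : Int) (st : PvASt) (P : List Nat)
    (hInv : PvMid st.trie st.cnt st.tidx P (fun _ => 0)) :
    ∀ (d : Nat), d ≤ 18 → ∀ (node : Int) (π : List Bool) (r : Nat),
      π.length = 18 - d →
      pvFollow st.trie 0 π = some node →
      0 < pvCount P π →
      r % 2 ^ d = 0 → r < 2 ^ 18 →
      pvQueryGo x d node (r : Int) st
        = ((r + ((P.filter fun m => pvMatches m π).map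
            fun m => (m ^^^ pvPat x) % 2 ^ d).foldl max 0 : Nat) : Int) := by
  intro d
  induction d with
  | zero =>
    intro _ node π r hπ hf hc hr hrlt
    have hzero : ((P.filter fun m => pvMatches m π).map fun m => (m ^^^ pvPat x) % 2 ^ 0)
        = (P.filter fun m => pvMatches m π).map fun _ => (0 : Nat) :=
      List.map_congr_left fun m _ => by simp [pow_zero, Nat.mod_one]
    have hfold : ∀ L : List Nat, (L.map fun _ => (0 : Nat)).foldl max 0 = 0 := by
      intro L
      induction L with
      | nil => rfl
      | cons a as ihL => simpa using ihL
    simp only [pvQueryGo, hzero, hfold]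
    simp
  | succ d ih =>
    intro hd1 node π r hπ hf hc hr hrlt
    have hd : d < 18 := by omega
    have hdvd : 2 ^ d ∣ r := dvd_trans (pow_dvd_pow 2 (by omega)) (Nat.dvd_of_mod_eq_zero hr)
    simp only [pvQueryGo]
    rw [pvWant_eq x hd, pvBitA_eq x hd]
    have hπlen : π.length = 17 - d := by omega
    have hsnocW : pvFollow st.trie 0 (π ++ [!(pvPat x).testBit d])
        = (if pvGetBit st.trie node (if !(pvPat x).testBit d then 1 else 0) = 0 then none
           else some (pvGetBit st.trie node (if !(pvPat x).testBit d then 1 else 0))) := by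
      rw [pvFollow_snoc, hf]
      rfl
    have hsnocB : pvFollow st.trie 0 (π ++ [(pvPat x).testBit d])
        = (if pvGetBit st.trie node (if (pvPat x).testBit d then 1 else 0) = 0 then none
           else some (pvGetBit st.trie node (if (pvPat x).testBit d then 1 else 0))) := by
      rw [pvFollow_snoc, hf]
      rfl
    have hfilterW : (P.filter fun m => pvMatches m (π ++ [!(pvPat x).testBit d]))
        = (P.filter fun m => pvMatches m π).filter
            fun m => m.testBit d = !(pvPat x).testBit d := by
      rw [List.filter_filter]
      apply List.filter_congr
      intro m _
      rw [pvMatches_snoc, hπlen]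
      have h17 : 17 - (17 - d) = d := by omega
      rw [h17]
      cases hq : pvMatches m π <;> cases hmb : m.testBit d <;>
        cases hpb : (pvPat x).testBit d <;> simp [hq, hmb, hpb]
    have hfilterB : (P.filter fun m => pvMatches m (π ++ [(pvPat x).testBit d]))
        = (P.filter fun m => pvMatches m π).filter
            fun m => m.testBit d = (pvPat x).testBit d := by
      rw [List.filter_filter]
      apply List.filter_congr
      intro m _
      rw [pvMatches_snoc, hπlen]
      have h17 : 17 - (17 - d) = d := by omega
      rw [h17]
      cases hq : pvMatches m π <;> cases hmb : m.testBit d <;>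
        cases hpb : (pvPat x).testBit d <;> simp [hq, hmb, hpb]
    by_cases hcond : pvGetBit st.trie node (if !(pvPat x).testBit d then 1 else 0) ≠ 0 ∧
        0 < st.cnt (pvGetBit st.trie node (if !(pvPat x).testBit d then 1 else 0)).toNat
    · rw [if_pos hcond]
      have hfW : pvFollow st.trie 0 (π ++ [!(pvPat x).testBit d])
          = some (pvGetBit st.trie node (if !(pvPat x).testBit d then 1 else 0)) := by
        rw [hsnocW, if_neg hcond.1]
      have hcnt := hInv.cnt_eq _ _ (by simp) (by simp [hπlen]; omega) hfW
      have hcpos : 0 < pvCount P (π ++ [!(pvPat x).testBit d]) := by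
        have h1 := hcond.2
        rw [hcnt] at h1
        omega
      obtain ⟨k, hk⟩ := Nat.dvd_of_mod_eq_zero hr
      have hr' : (r + 2 ^ d) % 2 ^ d = 0 := by
        have h1 : r + 2 ^ d = 2 ^ d * (2 * k + 1) := by rw [hk]; ring
        rw [h1, Nat.mul_mod_right]
      have hrlt' : r + 2 ^ d < 2 ^ 18 := by
        have h18 : (2 : Nat) ^ 18 = 2 ^ (d + 1) * 2 ^ (17 - d) := by
          rw [← pow_add]; congr 1; omega
        have hklt : k < 2 ^ (17 - d) := by
          by_contra hge
          have h2 : 2 ^ (d + 1) * 2 ^ (17 - d) ≤ 2 ^ (d + 1) * k :=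
            Nat.mul_le_mul_left _ (by omega)
          rw [← h18] at h2
          omega
        have h3 : 2 ^ (d + 1) * (k + 1) ≤ 2 ^ (d + 1) * 2 ^ (17 - d) :=
          Nat.mul_le_mul_left _ (by omega)
        rw [← h18] at h3
        have h4 : 2 ^ (d + 1) * (k + 1) = r + 2 ^ (d + 1) := by rw [hk]; ring
        have hp : (2 : Nat) ^ (d + 1) = 2 * 2 ^ d := by rw [pow_succ]; ring
        have hpos : 0 < (2 : Nat) ^ d := by positivity
        omega
      rw [pvBor_pow r d hr]
      rw [ih (by omega) (pvGetBit st.trie node (if !(pvPat x).testBit d then 1 else 0))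
        (π ++ [!(pvPat x).testBit d]) (r + 2 ^ d) (by simp [hπlen]; omega) hfW hcpos hr' hrlt']
      have hne : ((P.filter fun m => pvMatches m π).filter
          fun m => m.testBit d = !(pvPat x).testBit d) ≠ [] := by
        rw [← hfilterW]
        exact List.ne_nil_of_length_pos (by simpa [pvCount] using hcpos)
      have hsplit := pvMax_split (P.filter fun m => pvMatches m π) (pvPat x) d
        ((pvPat x).testBit d) rfl hne
      rw [hfilterW]
      congr 1
      rw [hsplit]
      omega
    · rw [if_neg hcond]
      push_neg at hcond
      have hcW : pvCount P (π ++ [!(pvPat x).testBit d]) = 0 := by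
        by_cases hw0 : pvGetBit st.trie node (if !(pvPat x).testBit d then 1 else 0) = 0
        · have hnone : pvFollow st.trie 0 (π ++ [!(pvPat x).testBit d]) = none := by
            rw [hsnocW, if_pos hw0]
          exact (hInv.cnt_none _ (by simp [hπlen]; omega) hnone).1
        · have hfW : pvFollow st.trie 0 (π ++ [!(pvPat x).testBit d])
              = some (pvGetBit st.trie node (if !(pvPat x).testBit d then 1 else 0)) := by
            rw [hsnocW, if_neg hw0]
          have hcnt := hInv.cnt_eq _ _ (by simp) (by simp [hπlen]; omega) hfW
          have hle := hcond hw0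
          rw [hcnt] at hle
          omega
      have hallb : ∀ m ∈ (P.filter fun m => pvMatches m π),
          m.testBit d = (pvPat x).testBit d := by
        intro m hm
        have hz : ((P.filter fun m => pvMatches m π).filter
            fun m => m.testBit d = !(pvPat x).testBit d) = [] := by
          rw [← hfilterW]
          simpa [pvCount, List.length_eq_zero_iff] using hcW
        have hnm := List.filter_eq_nil_iff.mp hz m hm
        cases hmb : m.testBit d <;> cases hpb : (pvPat x).testBit d <;> simp_all
      have hfilterB2 : (P.filter fun m => pvMatches m (π ++ [(pvPat x).testBit d]))
          = P.filter fun m => pvMatches m π := by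
        rw [hfilterB]
        exact List.filter_eq_self.mpr fun m hm => by simp [hallb m hm]
      have hcB : 0 < pvCount P (π ++ [(pvPat x).testBit d]) := by
        unfold pvCount at *
        rw [hfilterB2]
        exact hc
      have hwB : pvGetBit st.trie node (if (pvPat x).testBit d then 1 else 0) ≠ 0 := by
        intro h0
        have hnone : pvFollow st.trie 0 (π ++ [(pvPat x).testBit d]) = none := by
          rw [hsnocB, if_pos h0]
        have h1 := (hInv.cnt_none _ (by simp [hπlen]; omega) hnone).1
        omega
      have hfB : pvFollow st.trie 0 (π ++ [(pvPat x).testBit d])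
          = some (pvGetBit st.trie node (if (pvPat x).testBit d then 1 else 0)) := by
        rw [hsnocB, if_neg hwB]
      have hr2 : r % 2 ^ d = 0 := Nat.mod_eq_zero_of_dvd hdvd
      rw [ih (by omega) (pvGetBit st.trie node (if (pvPat x).testBit d then 1 else 0))
        (π ++ [(pvPat x).testBit d]) r (by simp [hπlen]; omega) hfB hcB hr2 hrlt]
      congr 1
      rw [hfilterB2,
        pvMax_flat (P.filter fun m => pvMatches m π) (pvPat x) d ((pvPat x).testBit d) rfl hallb]

lemma pvQuery_eq (x : Int) (st : PvASt) (P : List Nat)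
    (h : PvInv st.trie st.cnt st.tidx P) (hP : P ≠ []) :
    pvQuery x st = (((P.map fun m => m ^^^ pvPat x).foldl max 0 : Nat) : Int) := by
  have hMid : PvMid st.trie st.cnt st.tidx P (fun _ => 0) := h
  unfold pvQuery
  have hc : 0 < pvCount P [] := by
    unfold pvCount
    have hfe : (P.filter fun m => pvMatches m []) = P :=
      List.filter_eq_self.mpr fun a _ => pvMatches_nil a
    rw [hfe]
    exact List.length_pos_iff.mpr hP
  have hq := pvQueryGo_eq x st P hMid 18 le_rfl 0 [] 0 rfl rfl hc (by norm_num) (by positivity)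
  simp only [Nat.cast_zero] at hq
  rw [hq]
  congr 1
  rw [Nat.zero_add]
  have hfe : (P.filter fun m => pvMatches m []) = P :=
    List.filter_eq_self.mpr fun a _ => pvMatches_nil a
  rw [hfe]
  have hmap : (P.map fun m => (m ^^^ pvPat x) % 2 ^ 18) = P.map fun m => m ^^^ pvPat x :=
    List.map_congr_left fun m hm =>
      Nat.mod_eq_of_lt (Nat.xor_lt_two_pow (hMid.elt_lt m hm) (pvPat_lt x))
  rw [hmap]

lemma pvFoldMax_cast (val : Int) (l : List Int) : ∀ acc : Nat,
    l.foldl (fun m b => max m (pvScore val b)) (acc : Int)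
      = (((l.map fun b => pvPat b ^^^ pvPat val).foldl max acc : Nat) : Int) := by
  induction l with
  | nil => intro acc; simp
  | cons b bs ih =>
    intro acc
    simp only [List.foldl_cons, List.map_cons]
    rw [pvScore_eq, ← Nat.cast_max, ih]

lemma pvPathMax_eq (val : Int) (path : List Int) (hne : path ≠ []) :
    pvPathMax val path
      = ((((path.map pvPat).map fun m => m ^^^ pvPat val).foldl max 0 : Nat) : Int) := by
  cases path with
  | nil => exact absurd rfl hne
  | cons a rest =>
    simp only [pvPathMax, List.map_cons, List.foldl_cons, Nat.zero_max]
    rw [pvScore_eq, pvFoldMax_cast, List.map_map]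
    rfl

lemma pvInit_inv : PvInv (fun _ => (0, 0)) (fun _ => 0) 1 [] := by
  have hfol : ∀ (p : List Bool) (node : Int), p ≠ [] →
      pvFollow (fun _ => (0, 0)) node p = none := by
    intro p node hp
    cases p with
    | nil => exact absurd rfl hp
    | cons b bs => simp [pvFollow, pvGetBit]
  unfold PvInv
  refine ⟨by norm_num, ?_, ?_, ?_, ?_, ?_, ?_, ?_⟩
  · intro m hm; simp at hm
  · intro p i hf
    cases p with
    | nil =>
      simp only [pvFollow, Option.some.injEq] at hf
      omega
    | cons b bs =>
      rw [hfol _ _ (by simp)] at hf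
      exact absurd hf (by simp)
  · intro p i hp hf
    rw [hfol _ _ hp] at hf
    exact absurd hf (by simp)
  · intro p q i hp hq
    cases p with
    | nil =>
      cases q with
      | nil => rfl
      | cons b bs =>
        rw [hfol _ _ (by simp)] at hq
        exact absurd hq (by simp)
    | cons b bs =>
      rw [hfol _ _ (by simp)] at hp
      exact absurd hp (by simp)
  · intro p i hp hlen hf
    rw [hfol _ _ hp] at hf
    exact absurd hf (by simp)
  · intro p hlen hf
    exact ⟨by simp [pvCount], rfl⟩
  · intro j hj
    exact ⟨rfl, rfl⟩

-- ---- dict grouping ----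

lemma pvGroup_getD {γ β : Type} (items : List γ) (g : γ → Bool) (key : γ → Int) (val : γ → β)
    (d0 : PySem.Dict Int (List β)) (k : Int) :
    (items.foldl (fun d it => if g it then
        d.insert (key it) (d.getD (key it) [] ++ [val it]) else d) d0).getD k []
      = d0.getD k [] ++ (items.filter fun it => g it && (key it == k)).map val := by
  induction items generalizing d0 with
  | nil => simp
  | cons it its ih =>
    simp only [List.foldl_cons, List.filter_cons]
    by_cases hg : g it
    · rw [ih]
      by_cases hk : key it = k
      · subst hk
        simp [hg, PySem.Dict.getD_insert]
      · have hbk : (key it == k) = false := by simp [hk]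
        simp [hg, hbk, PySem.Dict.getD_insert, Ne.symm hk]
    · simp [hg, ih]

-- ---- stack bookkeeping ----

def pvTrues (s : List (Int × Bool)) : List Int :=
  s.filterMap fun e => if e.2 then some e.1 else none

lemma pvGroup_getD' {γ β : Type} (items : List γ) (key : γ → Int) (val : γ → β)
    (d0 : PySem.Dict Int (List β)) (k : Int) :
    (items.foldl (fun d it => d.insert (key it) (d.getD (key it) [] ++ [val it])) d0).getD k []
      = d0.getD k [] ++ (items.filter fun it => key it == k).map val := by
  have h1 := pvGroup_getD items (fun _ => true) key val d0 k
  simpa using h1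

lemma pvDict_getD_empty {β : Type} (k : Int) :
    (PySem.Dict.empty : PySem.Dict Int (List β)).getD k [] = [] := by
  first
  | rfl
  | simp [pysem]

lemma pvChildren_getD (parents : List Int) (k : Int) :
    ((PySem.List.enumerate parents).foldl
      (fun (d : PySem.Dict Int (List Int)) ip =>
        if ip.2 = -1 then d else d.insert ip.2 (d.getD ip.2 [] ++ [ip.1]))
      PySem.Dict.empty).getD k []
    = (((PySem.List.enumerate parents).filter
        fun ip => !(ip.2 == -1) && (ip.2 == k)).map fun ip => ip.1) := by
  have hfe : (fun (d : PySem.Dict Int (List Int)) (ip : Int × Int) =>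
      if ip.2 = -1 then d else d.insert ip.2 (d.getD ip.2 [] ++ [ip.1]))
      = fun (d : PySem.Dict Int (List Int)) ip =>
        if (!(ip.2 == -1) : Bool) then d.insert ip.2 (d.getD ip.2 [] ++ [ip.1]) else d := by
    funext d ip
    by_cases hp : ip.2 = -1 <;> simp [hp]
  rw [hfe,
    pvGroup_getD (PySem.List.enumerate parents) (fun ip => !(ip.2 == -1)) (fun ip => ip.2)
      (fun ip => ip.1) PySem.Dict.empty k,
    pvDict_getD_empty]
  simp

lemma pvQmap_getD (queries : List (List Int)) (k : Int) :
    ((PySem.List.enumerate queries).foldl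
      (fun (m : PySem.Dict Int (List (Int × Int))) iq =>
        m.insert (iq.2.getD 0 0) (m.getD (iq.2.getD 0 0) [] ++ [(iq.2.getD 1 0, iq.1)]))
      PySem.Dict.empty).getD k []
    = (((PySem.List.enumerate queries).filter fun iq => iq.2.getD 0 0 == k).map
        fun iq => (iq.2.getD 1 0, iq.1)) := by
  rw [pvGroup_getD' (PySem.List.enumerate queries) (fun iq => iq.2.getD 0 0)
    (fun iq => (iq.2.getD 1 0, iq.1)) PySem.Dict.empty k, pvDict_getD_empty]
  simp

lemma pvTrues_false (c : Int) (stack : List (Int × Bool)) :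
    pvTrues ((c, false) :: stack) = pvTrues stack := by
  simp [pvTrues]

lemma pvTrues_true (c : Int) (stack : List (Int × Bool)) :
    pvTrues ((c, true) :: stack) = c :: pvTrues stack := by
  simp [pvTrues]

lemma pvTrues_pushB (l : List (Int × Int)) (node : Int) : ∀ stack : List (Int × Bool),
    pvTrues (l.foldl (fun s ip => if ip.2 = node then (ip.1, false) :: s else s) stack)
      = pvTrues stack := by
  induction l with
  | nil => intro stack; rfl
  | cons a as ih =>
    intro stack
    rw [List.foldl_cons]
    by_cases hp : a.2 = node
    · rw [if_pos hp, ih, pvTrues_false]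
    · rw [if_neg hp, ih]

lemma pvPush_eq (parents : List Int) (node : Int) (stack : List (Int × Bool)) :
    (((PySem.List.enumerate parents).foldl
        (fun (d : PySem.Dict Int (List Int)) ip =>
          if ip.2 = -1 then d else d.insert ip.2 (d.getD ip.2 [] ++ [ip.1]))
        PySem.Dict.empty).getD node []).foldl (fun s c => (c, false) :: s) stack
    = if node = -1 then stack
      else (PySem.List.enumerate parents).foldl
        (fun s ip => if ip.2 = node then (ip.1, false) :: s else s) stack := by
  rw [pvChildren_getD]
  by_cases hn : node = -1
  · subst hn
    have hfil : ((PySem.List.enumerate parents).filter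
        fun ip => !(ip.2 == -1) && (ip.2 == -1)) = [] := by
      apply List.filter_eq_nil_iff.mpr
      intro ip _
      by_cases hp : ip.2 = -1 <;> simp [hp]
    rw [hfil, if_pos rfl]
    rfl
  · rw [if_neg hn]
    have hfil : ((PySem.List.enumerate parents).filter
        fun ip => !(ip.2 == -1) && (ip.2 == node))
        = (PySem.List.enumerate parents).filter fun ip => ip.2 == node := by
      apply List.filter_congr
      intro ip _
      by_cases hp : ip.2 = node
      · rw [hp]
        simp [hn]
      · simp [hp]
    rw [hfil, List.foldl_map, List.foldl_filter]
    have hfun : (fun (s : List (Int × Bool)) (ip : Int × Int) =>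
        if (ip.2 == node) = true then (ip.1, false) :: s else s)
        = fun s ip => if ip.2 = node then (ip.1, false) :: s else s := by
      funext s ip
      by_cases hp : ip.2 = node <;> simp [hp]
    rw [hfun]

lemma pvAns_eq (queries : List (List Int)) (node : Int) (st1 : PvASt) (path1 : List Int)
    (hInv : PvInv st1.trie st1.cnt st1.tidx (path1.map pvPat)) (hne : path1 ≠ [])
    (ans : List Int) :
    (((PySem.List.enumerate queries).foldl
        (fun (m : PySem.Dict Int (List (Int × Int))) iq =>
          m.insert (iq.2.getD 0 0) (m.getD (iq.2.getD 0 0) [] ++ [(iq.2.getD 1 0, iq.1)]))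
        PySem.Dict.empty).getD node []).foldl
      (fun a vi => a.set vi.2.toNat (pvQuery vi.1 st1)) ans
    = (PySem.List.enumerate queries).foldl
        (fun a iq => if iq.2.getD 0 0 = node then
          a.set iq.1.toNat (pvPathMax (iq.2.getD 1 0) path1) else a) ans := by
  rw [pvQmap_getD, List.foldl_map, List.foldl_filter]
  have hPne : path1.map pvPat ≠ [] := by
    intro he
    exact hne (List.map_eq_nil_iff.mp he)
  have hfun : (fun (a : List Int) (iq : Int × List Int) =>
      if (iq.2.getD 0 0 == node) = true then
        a.set ((iq.2.getD 1 0, iq.1)).2.toNat (pvQuery ((iq.2.getD 1 0, iq.1)).1 st1) else a)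
      = fun a iq => if iq.2.getD 0 0 = node then
          a.set iq.1.toNat (pvPathMax (iq.2.getD 1 0) path1) else a := by
    funext a iq
    by_cases hp : iq.2.getD 0 0 = node
    · have hqe := pvQuery_eq (iq.2.getD 1 0) st1 (path1.map pvPat) hInv hPne
      have hpe := pvPathMax_eq (iq.2.getD 1 0) path1 hne
      simp only [hp]
      rw [if_pos trivial, hqe, hpe]
      simp
    · rw [if_neg (by simpa using hp), if_neg hp]
  rw [hfun]

lemma pvCR_proj (parents : List Int) (d0 : PySem.Dict Int (List Int)) (r0 : Int) :
    ((PySem.List.enumerate parents).foldl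
      (fun (acc : PySem.Dict Int (List Int) × Int) ip =>
        if ip.2 = -1 then (acc.1, ip.1)
        else (acc.1.insert ip.2 (acc.1.getD ip.2 [] ++ [ip.1]), acc.2)) (d0, r0))
    = ((PySem.List.enumerate parents).foldl
        (fun (d : PySem.Dict Int (List Int)) ip =>
          if ip.2 = -1 then d else d.insert ip.2 (d.getD ip.2 [] ++ [ip.1])) d0,
       (PySem.List.enumerate parents).foldl (fun r ip => if ip.2 = -1 then ip.1 else r) r0) := by
  generalize PySem.List.enumerate parents = l
  induction l generalizing d0 r0 with
  | nil => rfl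
  | cons a l ih =>
    simp only [List.foldl_cons]
    by_cases ha : a.2 = -1 <;> simp [ha, ih]

lemma pvLockstep (parents : List Int) (queries : List (List Int)) :
    ∀ (fuel : Nat) (stack : List (Int × Bool)) (st : PvASt) (path : List Int) (ans : List Int),
      PvInv st.trie st.cnt st.tidx (path.map pvPat) →
      pvTrues stack = path →
      pvDfsA
        ((PySem.List.enumerate parents).foldl
          (fun (d : PySem.Dict Int (List Int)) ip =>
            if ip.2 = -1 then d else d.insert ip.2 (d.getD ip.2 [] ++ [ip.1]))
          PySem.Dict.empty)
        ((PySem.List.enumerate queries).foldl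
          (fun (m : PySem.Dict Int (List (Int × Int))) iq =>
            m.insert (iq.2.getD 0 0) (m.getD (iq.2.getD 0 0) [] ++ [(iq.2.getD 1 0, iq.1)]))
          PySem.Dict.empty)
        fuel stack st ans
      = pvDfsB parents queries fuel stack path ans := by
  intro fuel
  induction fuel with
  | zero =>
    intro stack st path ans _ _
    rfl
  | succ f ih =>
    intro stack st path ans hInv htrues
    cases stack with
    | nil => rfl
    | cons e rest =>
      obtain ⟨nd, lv⟩ := e
      cases lv
      · -- entering nd
        simp only [pvDfsA, pvDfsB]
        rw [if_neg (by simp), if_neg (by simp)]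
        rw [pvTrues_false] at htrues
        have hInv' : PvInv (pvInsert nd st).trie (pvInsert nd st).cnt (pvInsert nd st).tidx
            ((nd :: path).map pvPat) := by
          simpa using pvInsert_inv nd st (path.map pvPat) hInv
        rw [pvAns_eq queries nd (pvInsert nd st) (nd :: path) hInv' (by simp) ans,
          pvPush_eq parents nd ((nd, true) :: rest)]
        apply ih _ (pvInsert nd st) (nd :: path) _ hInv'
        by_cases hn : nd = -1
        · rw [if_pos hn, pvTrues_true, htrues]
        · rw [if_neg hn, pvTrues_pushB, pvTrues_true, htrues]
      · -- leaving nd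
        simp only [pvDfsA, pvDfsB]
        rw [if_pos trivial, if_pos trivial]
        rw [pvTrues_true] at htrues
        have hpath : path = nd :: pvTrues rest := htrues.symm
        subst hpath
        have hInv' : PvInv (pvRemove nd st).trie (pvRemove nd st).cnt (pvRemove nd st).tidx
            (((nd :: pvTrues rest).drop 1).map pvPat) := by
          simpa using pvRemove_inv nd st ((pvTrues rest).map pvPat) (by simpa using hInv)
        apply ih _ (pvRemove nd st) ((nd :: pvTrues rest).drop 1) _ hInv'
        simp

-- ===== VERDICT (by name: the statement is the Claim_ definition above) =====
theorem maxGeneticDifference_spec : Claim_equal_maxGeneticDifference := by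
  intro parents queries _ _
  unfold Spec_maxGeneticDifference
  simp only [maxGeneticDifference, maxGeneticDifference_alt, pvCR_proj]
  exact pvLockstep parents queries (2 * parents.length + 3) _
    ⟨fun _ => (0, 0), fun _ => 0, 1⟩ [] _ pvInit_inv rfl
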